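-- pv_equiv track=rewrite | github.com/waldstein94/Stratified-Transformer | util/train_utils.py | aggregate_pairs_v2
-- ===== SOURCE A (Python) =====
-- def aggregate_pairs_v2(pair_list):
--     # Generate data
--     face_ids = set([])
--     edge_ids = []
--     edge_info = {}
--     for pair in pair_list:
--         edge_id = pair[-1]
--         if len(pair) == 3:
--             face_1_id = pair[0]
--             face_2_id = pair[1]
--             face_ids.add(face_1_id)
--             face_ids.add(face_2_id)
--         else:
--             face_1_id = pair[0]
--             face_2_id = None
--             face_ids.add(face_1_id)
--         edge_ids.append(edge_id)
--         edge_info[edge_id] = (face_1_id, face_2_id)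
--     face_ids = list(face_ids)
--
--     # Make adjacency list
--     adj_list = {f: [] for f in face_ids}
--     for e in edge_ids:
--         f1 = edge_info[e][0]
--         f2 = edge_info[e][1]
--         if f1 == None or f2 == None: continue
--         adj_list[f1].append(f2)
--         adj_list[f2].append(f1)
--
--     # DFS for finding connected component groups
--     def explore(i, obj_num, obj_ids):
--         obj_ids[i] = obj_num
--         for j in adj_list[i]:
--             if obj_ids[j] == -1:
--                 explore(j, obj_num, obj_ids)
--
--     obj_ids = [-1 for i in range(max(face_ids + edge_ids) + 1)]
--     obj_num = 0
--     for f in face_ids: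
--         if obj_ids[f] == -1:
--             explore(f, obj_num, obj_ids)
--             obj_num += 1
--
--     # Assign obj ids for edges
--     for e in edge_ids:
--         if edge_info[e][0] != None:
--             obj_ids[e] = obj_ids[edge_info[e][0]]
--         else:
--             obj_ids[e] = obj_ids[edge_info[e][1]]
--
--     return obj_ids
-- ===== SOURCE B (Python) =====
-- def aggregate_pairs_v2(pair_list):
--     # Parse pairs: faces (set, same insertion order), edge list, last-wins edge info
--     face_ids = set([])
--     edge_ids = []
--     edge_info = {}
--     for pair in pair_list:
--         edge_id = pair[-1]
--         face_1_id = pair[0]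
--         face_2_id = pair[1] if len(pair) == 3 else None
--         face_ids.add(face_1_id)
--         if face_2_id is not None:
--             face_ids.add(face_2_id)
--         edge_ids.append(edge_id)
--         edge_info[edge_id] = (face_1_id, face_2_id)
--
--     # Connected components by label merging: comp maps each face to a class
--     # representative; a two-face edge merges the two classes by relabelling.
--     comp = {f: f for f in face_ids}
--     for e in edge_ids:
--         f1, f2 = edge_info[e]
--         if f1 is None or f2 is None:
--             continue
--         a, b = comp[f1], comp[f2]
--         if a != b:
--             for k in comp:
--                 if comp[k] == a:
--                     comp[k] = b
--
--     # Component numbers in order of first appearance along the face set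
--     out = [-1] * (max(max(face_ids), max(edge_ids)) + 1)
--     labels = {}
--     num = 0
--     for f in face_ids:
--         r = comp[f]
--         if r not in labels:
--             labels[r] = num
--             num += 1
--         out[f] = labels[r]
--
--     # Edge labels from the (live) output array, as in the original
--     for e in edge_ids:
--         out[e] = out[edge_info[e][0]]
--     return out
-- ===== Notes on version B (the rewrite author's own statement) =====
-- stated objective: alternative
-- what changed: Connected components are computed by a flat label-merging map over face ids (a union-find without trees: each two-face edge rewrites one class label into the other) and component numbers are assigned lazily in face-set order; A builds an adjacency dict and numbers components by recursive DFS. Both keep A's output-array layout and edge-label propagation.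
-- outside the precondition, e.g. on aggregate_pairs_v2([[-1, 0], [3, 1]]): A returns [0, 0, -1, 0], B returns [1, 1, -1, 1]
import Mathlib
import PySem

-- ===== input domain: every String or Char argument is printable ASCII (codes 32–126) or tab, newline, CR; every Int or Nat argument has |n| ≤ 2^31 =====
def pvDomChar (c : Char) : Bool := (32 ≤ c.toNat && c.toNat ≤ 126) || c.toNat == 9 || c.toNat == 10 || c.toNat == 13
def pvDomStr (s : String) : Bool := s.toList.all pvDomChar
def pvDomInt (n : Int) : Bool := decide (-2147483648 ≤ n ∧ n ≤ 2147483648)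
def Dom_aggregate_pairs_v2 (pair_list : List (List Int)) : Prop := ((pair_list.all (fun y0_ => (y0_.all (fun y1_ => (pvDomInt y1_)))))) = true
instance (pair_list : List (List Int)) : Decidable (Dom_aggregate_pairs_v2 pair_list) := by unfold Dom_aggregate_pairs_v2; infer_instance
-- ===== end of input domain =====

-- B replaces A's adjacency-list + recursive DFS by connected components computed with a
-- label-merging map (a flat union-find): no graph is built and no traversal happens.
-- Shared by both ports: an exact model of CPython's set-of-int iteration order (int hashes
-- are unsalted, so `list(face_ids)` is deterministic; the model was validated against
-- CPython 3.11 on randomized inputs), since the component numbering follows that order.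

-- ===== PORT A =====

-- CPython set-of-int table model (shared helper: both Pythons build the identical set).
def pvHash (x : Int) : Int := if x = -1 then -2 else x

-- (size_t)hash & mask  (two's-complement cast, table size a power of two)
def pvHStart (h : Int) (size : Nat) : Nat := (h % (2 ^ 64 : Int)).toNat % size

-- first empty slot among i, i+1, …, i+k  (the linear-probe window)
def pvFirstEmpty (t : List (Option Int)) (i k : Nat) : Option Nat :=
  (List.range (k + 1)).findSome? (fun d => if t.getD (i + d) (some 0) = none then some (i + d) else none)

-- CPython set_add_entry/set_insert_clean probing: slot i, a 9-slot linear window when it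
-- fits under the mask, then i = i*5 + 1 + (perturb >>= 5).  The fuel never runs out for a
-- table kept below 3/5 load (perturb dies after 13 shifts, then i = 5i+1 cycles all slots);
-- the fuel-out value is defensive totalization only.
def pvFindSlotGo (t : List (Option Int)) : Nat → Nat → Nat → Nat
  | 0, _, _ => t.length
  | fuel + 1, i, p =>
      let k := if i + 9 ≤ t.length - 1 then 9 else 0
      match pvFirstEmpty t i k with
      | some j => j
      | none => pvFindSlotGo t fuel ((i * 5 + 1 + p / 32) % t.length) (p / 32)

def pvFindSlot (t : List (Option Int)) (h : Int) : Nat :=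
  pvFindSlotGo t (t.length + 70) (pvHStart h t.length) ((h % (2 ^ 64 : Int)).toNat)

def pvInsertAt (t : List (Option Int)) (x : Int) : List (Option Int) :=
  if t.getD (pvFindSlot t (pvHash x)) (some 0) = none then
    t.set (pvFindSlot t (pvHash x)) (some x)
  else t ++ [some x]

-- while newsize <= minused: newsize <<= 1   (fuel-bounded; the fuel suffices)
def pvNewSizeGo (minused : Nat) : Nat → Nat → Nat
  | 0, ns => ns
  | f + 1, ns => if ns ≤ minused then pvNewSizeGo minused f (ns * 2) else ns

-- a set is (table, insertion-ordered distinct keys); fill = used = seen.length (no deletions)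
def pvSetAdd (s : List (Option Int) × List Int) (x : Int) : List (Option Int) × List Int :=
  if x ∈ s.2 then s
  else
    let t := pvInsertAt s.1 x
    let seen := s.2 ++ [x]
    if seen.length * 5 ≥ (t.length - 1) * 3 then
      let minused := if seen.length > 50000 then seen.length * 2 else seen.length * 4
      let ns := pvNewSizeGo minused (minused + 8) 8
      ((t.filterMap id).foldl pvInsertAt (List.replicate ns none), seen)
    else (t, seen)

def pvSetEmpty : List (Option Int) × List Int := (List.replicate 8 none, [])

-- iteration order = table slot order
def pvSetList (s : List (Option Int) × List Int) : List Int := s.1.filterMap id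

-- pair[i]  (total form; Pre_ keeps every access in range)
def pvGetI (xs : List Int) (i : Int) : Int := (PySem.List.pyGet? xs i).getD 0

-- the parsing loop of A: face set, edge_ids, edge_info (last write wins);
-- face_1_id is pair[0] in BOTH branches of A, so it is an Int (never None) here.
def pvStepA (acc : (List (Option Int) × List Int) × List Int × PySem.Dict Int (Int × Option Int))
    (pair : List Int) :
    (List (Option Int) × List Int) × List Int × PySem.Dict Int (Int × Option Int) :=
  if pair.length = 3 then
    (pvSetAdd (pvSetAdd acc.1 (pvGetI pair 0)) (pvGetI pair 1),
     acc.2.1 ++ [pvGetI pair (-1)],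
     acc.2.2.insert (pvGetI pair (-1)) (pvGetI pair 0, some (pvGetI pair 1)))
  else
    (pvSetAdd acc.1 (pvGetI pair 0),
     acc.2.1 ++ [pvGetI pair (-1)],
     acc.2.2.insert (pvGetI pair (-1)) (pvGetI pair 0, none))

def pvParseA (pair_list : List (List Int)) :
    (List (Option Int) × List Int) × List Int × PySem.Dict Int (Int × Option Int) :=
  pair_list.foldl pvStepA (pvSetEmpty, [], PySem.Dict.empty)

-- `if f1 == None or f2 == None: continue` (f1 is never None); append both directions
def pvAdjStep (edge_info : PySem.Dict Int (Int × Option Int))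
    (d : PySem.Dict Int (List Int)) (e : Int) : PySem.Dict Int (List Int) :=
  match (edge_info.getD e (0, none)).2 with
  | none => d
  | some f2 =>
      (d.modify (edge_info.getD e (0, none)).1 [] (fun l => l ++ [f2])).modify f2 []
        (fun l => l ++ [(edge_info.getD e (0, none)).1])

-- obj_ids[e] = obj_ids[edge_info[e][0]]  (the shared final loop of A and Source B)
def pvEdgeStep (edge_info : PySem.Dict Int (Int × Option Int)) (o : List Int) (e : Int) :
    List Int :=
  PySem.List.pySetD o e ((PySem.List.pyGet? o (edge_info.getD e (0, none)).1).getD 0)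

-- def explore(i, obj_num, obj_ids) — the recursion carries fuel (depth ≤ #unmarked cells + 1,
-- and the caller passes obj_ids.length + 1, which Pre_ makes sufficient)
def pvExplore (adj : PySem.Dict Int (List Int)) : Nat → Int → Int → List Int → List Int
  | 0, _, _, out => out
  | fuel + 1, i, n, out =>
      (adj.getD i []).foldl
        (fun o j => if (PySem.List.pyGet? o j).getD 0 = -1 then pvExplore adj fuel j n o else o)
        (PySem.List.pySetD out i n)

-- the outer DFS loop of A: start a numbered exploration at each still-unlabelled face
def pvLoopA (adj : PySem.Dict Int (List Int)) (q : List Int × Int) (f : Int) :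
    List Int × Int :=
  if (PySem.List.pyGet? q.1 f).getD 0 = -1 then
    (pvExplore adj (q.1.length + 1) f q.2 q.1, q.2 + 1)
  else q

def aggregate_pairs_v2 (pair_list : List (List Int)) : List Int :=
  let p := pvParseA pair_list
  let face_ids := pvSetList p.1
  let edge_ids := p.2.1
  let edge_info := p.2.2
  -- adj_list = {f: [] for f in face_ids}; then append both directions per two-face edge
  let adj0 : PySem.Dict Int (List Int) := face_ids.foldl (fun d f => d.insert f []) PySem.Dict.empty
  let adj := edge_ids.foldl (pvAdjStep edge_info) adj0
  -- obj_ids = [-1] * (max(face_ids + edge_ids) + 1)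
  let mx := (PySem.List.max? (face_ids ++ edge_ids) (fun x => x)).getD 0
  let obj0 : List Int := List.replicate (mx + 1).toNat (-1)
  -- DFS numbering of components in face_ids order
  let st := face_ids.foldl (pvLoopA adj) (obj0, 0)
  -- edge labels: `edge_info[e][0] != None` is identically true (face_1_id is never None)
  edge_ids.foldl (pvEdgeStep edge_info) st.1

-- ===== PORT B =====

-- the parsing loop of Source B (same set-insertion sequence, stated once)
def pvStepB (acc : (List (Option Int) × List Int) × List Int × PySem.Dict Int (Int × Option Int))
    (pair : List Int) :
    (List (Option Int) × List Int) × List Int × PySem.Dict Int (Int × Option Int) :=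
  (match (if pair.length = 3 then some (pvGetI pair 1) else none) with
   | some v => pvSetAdd (pvSetAdd acc.1 (pvGetI pair 0)) v
   | none => pvSetAdd acc.1 (pvGetI pair 0),
   acc.2.1 ++ [pvGetI pair (-1)],
   acc.2.2.insert (pvGetI pair (-1))
     (pvGetI pair 0, if pair.length = 3 then some (pvGetI pair 1) else none))

def pvParseB (pair_list : List (List Int)) :
    (List (Option Int) × List Int) × List Int × PySem.Dict Int (Int × Option Int) :=
  pair_list.foldl pvStepB (pvSetEmpty, [], PySem.Dict.empty)

-- one union: rewrite every occurrence of class label a into b (skip one-face edges)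
def pvCompStep (edge_info : PySem.Dict Int (Int × Option Int)) (c : PySem.Dict Int Int)
    (e : Int) : PySem.Dict Int Int :=
  match (edge_info.getD e (0, none)).2 with
  | none => c
  | some f2 =>
      if c.getD (edge_info.getD e (0, none)).1 0 ≠ c.getD f2 0 then
        PySem.Dict.mk (c.items.map (fun kv =>
          (kv.1, if kv.2 = c.getD (edge_info.getD e (0, none)).1 0 then c.getD f2 0 else kv.2)))
      else c

-- Source B's labelling loop: next fresh number on first sight of a class, write out[f]
def pvLabelStep (comp : PySem.Dict Int Int) (q : List Int × PySem.Dict Int Int × Int)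
    (f : Int) : List Int × PySem.Dict Int Int × Int :=
  match q.2.1.get? (comp.getD f 0) with
  | some l => (PySem.List.pySetD q.1 f l, q.2.1, q.2.2)
  | none => (PySem.List.pySetD q.1 f q.2.2, q.2.1.insert (comp.getD f 0) q.2.2, q.2.2 + 1)

def aggregate_pairs_v2_alt (pair_list : List (List Int)) : List Int :=
  let p := pvParseB pair_list
  let face_ids := pvSetList p.1
  let edge_ids := p.2.1
  let edge_info := p.2.2
  -- comp = {f: f for f in face_ids}; each two-face edge merges two classes by relabelling
  let comp0 : PySem.Dict Int Int := face_ids.foldl (fun d f => d.insert f f) PySem.Dict.empty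
  let comp := edge_ids.foldl (pvCompStep edge_info) comp0
  -- out = [-1] * (max(max(face_ids), max(edge_ids)) + 1)
  let mx := max ((PySem.List.max? face_ids (fun x => x)).getD 0)
               ((PySem.List.max? edge_ids (fun x => x)).getD 0)
  let out0 : List Int := List.replicate (mx + 1).toNat (-1)
  -- component numbers in order of first appearance along the face set
  let st := face_ids.foldl (pvLabelStep comp) (out0, PySem.Dict.empty, 0)
  -- edge labels from the (live) output array, as in A
  edge_ids.foldl (pvEdgeStep edge_info) st.1

-- ===== PRECONDITION & SPEC =====

-- the ids A indexes the output array with: pair[0] and pair[-1] always, pair[1] for 3-pairs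
def pvUsedOf (p : List Int) : List Int :=
  [pvGetI p 0, pvGetI p (-1)] ++ (if p.length = 3 then [pvGetI p 1] else [])

def pvFacesOf (p : List Int) : List Int :=
  [pvGetI p 0] ++ (if p.length = 3 then [pvGetI p 1] else [])

def pvUsedIds (pair_list : List (List Int)) : List Int := pair_list.flatMap pvUsedOf

def pvFaceIds (pair_list : List (List Int)) : List Int := pair_list.flatMap pvFacesOf

-- Pre_ excludes: the empty list and empty pairs (A raises ValueError/IndexError); ids below
-- -(max+1) (IndexError); and inputs where a negative face id aliases another face's cell
-- under Python's negative indexing (two faces x < 0 and x+max+1 share one array cell) —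
-- there the DFS bookkeeping reads labels through the shared cell and neither program's
-- result is a specified behaviour.
def Pre_aggregate_pairs_v2 (pair_list : List (List Int)) : Prop :=
  pair_list ≠ [] ∧ (∀ p ∈ pair_list, p ≠ []) ∧
  (∀ x ∈ pvUsedIds pair_list, -(((PySem.List.max? (pvUsedIds pair_list) (fun x => x)).getD 0) + 1) ≤ x) ∧
  (∀ x ∈ pvFaceIds pair_list, x < 0 →
      (x + ((PySem.List.max? (pvUsedIds pair_list) (fun x => x)).getD 0) + 1) ∉ pvFaceIds pair_list)

instance (pair_list : List (List Int)) : Decidable (Pre_aggregate_pairs_v2 pair_list) := by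
  unfold Pre_aggregate_pairs_v2; infer_instance

def pvWitness_aggregate_pairs_v2 : List (List Int) := [[0, 1, 4], [2, 5], [2, 3, 6]]

def Spec_aggregate_pairs_v2 (pair_list : List (List Int)) (out : List Int) : Prop :=
  out = aggregate_pairs_v2_alt pair_list
instance (pair_list : List (List Int)) (out : List Int) : Decidable (Spec_aggregate_pairs_v2 pair_list out) := by
  unfold Spec_aggregate_pairs_v2; infer_instance

-- ===== CLAIM (what is proved, stated in full; the proofs are below) =====
def Claim_equal_aggregate_pairs_v2 : Prop := ∀ (pair_list : List (List Int)), Dom_aggregate_pairs_v2 pair_list → Pre_aggregate_pairs_v2 pair_list → Spec_aggregate_pairs_v2 pair_list (aggregate_pairs_v2 pair_list)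

-- ===== LEMMAS AND PROOFS =====

-- ===== set model invariants =====
theorem pvInsertAt_keys (t : List (Option Int)) (x : Int) :
    List.Perm ((pvInsertAt t x).filterMap id) (x :: t.filterMap id) := by
  unfold pvInsertAt
  split
  · rename_i h
    have hj : pvFindSlot t (pvHash x) < t.length := by
      by_contra hge
      rw [List.getD_eq_default _ _ (le_of_not_gt (by omega))] at h
      simp at h
    set j := pvFindSlot t (pvHash x) with hjdef
    have hnone : t[j] = none := by
      rwa [List.getD_eq_getElem _ _ hj] at h
    rw [List.set_eq_take_cons_drop _ hj]
    conv_rhs => rw [← List.take_append_drop j t, List.drop_eq_getElem_cons hj, hnone]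
    simp [List.filterMap_append]
  · simp [List.filterMap_append]

theorem pvFoldInsertAt_keys (l : List Int) (t : List (Option Int)) :
    List.Perm ((l.foldl pvInsertAt t).filterMap id) (l ++ t.filterMap id) := by
  induction l generalizing t with
  | nil => simp
  | cons a l ih =>
      simp only [List.foldl_cons]
      refine ((ih _).trans (List.Perm.append_left l (pvInsertAt_keys t a))).trans ?_
      exact List.perm_middle

theorem pvSetAdd_seen (s : List (Option Int) × List Int) (x : Int) :
    (pvSetAdd s x).2 = if x ∈ s.2 then s.2 else s.2 ++ [x] := by
  unfold pvSetAdd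
  split
  · simp_all
  · rename_i h; simp only [if_neg h]; split <;> rfl

theorem pvSetAdd_keys (s : List (Option Int) × List Int) (x : Int)
    (h : List.Perm (s.1.filterMap id) s.2) :
    List.Perm ((pvSetAdd s x).1.filterMap id) (pvSetAdd s x).2 := by
  rw [pvSetAdd_seen]
  unfold pvSetAdd
  split
  · exact h
  · rename_i hm
    simp only [if_neg hm]
    have base : List.Perm ((pvInsertAt s.1 x).filterMap id) (s.2 ++ [x]) :=
      ((pvInsertAt_keys s.1 x).trans (h.cons x)).trans (List.perm_append_singleton x s.2).symm
    split
    · refine (pvFoldInsertAt_keys _ _).trans ?_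
      simpa using base
    · exact base

theorem pvFoldSetAdd_mem (l : List Int) (s : List (Option Int) × List Int) (x : Int) :
    x ∈ (l.foldl pvSetAdd s).2 ↔ x ∈ l ∨ x ∈ s.2 := by
  induction l generalizing s with
  | nil => simp
  | cons a l ih =>
      simp only [List.foldl_cons]
      rw [ih, pvSetAdd_seen]
      split <;> rename_i hm <;> simp <;> aesop

theorem pvFoldSetAdd_keys (l : List Int) (s : List (Option Int) × List Int)
    (h : List.Perm (s.1.filterMap id) s.2) :
    List.Perm ((l.foldl pvSetAdd s).1.filterMap id) (l.foldl pvSetAdd s).2 := by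
  induction l generalizing s with
  | nil => exact h
  | cons a l ih => exact ih _ (pvSetAdd_keys s a h)

-- ===== parse-stage lemmas =====
theorem pvStepB_eq : pvStepB = pvStepA := by
  funext acc pair
  by_cases hp : pair.length = 3 <;> simp [pvStepA, pvStepB, hp]

theorem pvParseB_eq (pl : List (List Int)) : pvParseB pl = pvParseA pl := by
  unfold pvParseA pvParseB; rw [pvStepB_eq]

theorem pvParse_set (pl : List (List Int)) :
    ∀ acc, (pl.foldl pvStepA acc).1 = (pl.flatMap pvFacesOf).foldl pvSetAdd acc.1 := by
  induction pl with
  | nil => intro acc; rfl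
  | cons p pl ih =>
      intro acc
      simp only [List.foldl_cons, List.flatMap_cons, List.foldl_append]
      rw [ih]
      congr 1
      by_cases hp : p.length = 3 <;> simp [pvStepA, pvFacesOf, hp]

theorem pvParse_edges (pl : List (List Int)) :
    ∀ acc, (pl.foldl pvStepA acc).2.1 = acc.2.1 ++ pl.map (fun p => pvGetI p (-1)) := by
  induction pl with
  | nil => intro acc; simp
  | cons p pl ih =>
      intro acc
      simp only [List.foldl_cons, List.map_cons]
      rw [ih]
      by_cases hp : p.length = 3 <;> simp [pvStepA, hp]

-- info values point at faces (S = membership in the full face-id list)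
theorem pvParse_info_mem (pl : List (List Int)) (S : Int → Prop)
    (hS : ∀ p ∈ pl, S (pvGetI p 0) ∧ (p.length = 3 → S (pvGetI p 1))) :
    ∀ acc, (∀ e v, acc.2.2.get? e = some v → S v.1 ∧ (∀ w, v.2 = some w → S w)) →
      ∀ e v, (pl.foldl pvStepA acc).2.2.get? e = some v → S v.1 ∧ (∀ w, v.2 = some w → S w) := by
  induction pl with
  | nil => intro acc h; exact h
  | cons p pl ih =>
      intro acc h
      simp only [List.foldl_cons]
      refine ih (fun q hq => hS q (List.mem_cons_of_mem _ hq)) _ ?_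
      intro e v hv
      by_cases hp : p.length = 3 <;> simp only [pvStepA, hp, if_pos, if_neg, ite_true, ite_false] at hv
      · rw [PySem.Dict.get?_insert] at hv
        split at hv
        · cases hv
          refine ⟨(hS p (List.mem_cons_self)).1, ?_⟩
          intro w hw; cases hw; exact (hS p List.mem_cons_self).2 hp
        · exact h e v hv
      · rw [PySem.Dict.get?_insert] at hv
        split at hv
        · cases hv
          exact ⟨(hS p List.mem_cons_self).1, by intro w hw; cases hw⟩
        · exact h e v hv

-- ===== extremum lemmas =====
theorem pvMax_spec (l : List Int) (h : l ≠ []) :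
    (PySem.List.max? l (fun x => x)).getD 0 ∈ l ∧
      ∀ y ∈ l, y ≤ (PySem.List.max? l (fun x => x)).getD 0 := by
  have hne : PySem.List.max? l (fun x => x) ≠ none := by
    intro hc; exact h ((PySem.List.max?_eq_none_iff l (fun x => x)).mp hc)
  rcases Option.ne_none_iff_exists'.mp hne with ⟨m, hm⟩
  rw [hm]
  exact ⟨PySem.List.max?_mem hm, fun y hy => PySem.List.max?_isMax hm y hy⟩

theorem pvMax_eq_of_same_mem (l1 l2 : List Int) (h1 : l1 ≠ [])
    (hm : ∀ x, x ∈ l1 ↔ x ∈ l2) :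
    (PySem.List.max? l1 (fun x => x)).getD 0 = (PySem.List.max? l2 (fun x => x)).getD 0 := by
  have h2 : l2 ≠ [] := by
    intro h; subst h
    rcases List.exists_mem_of_ne_nil l1 h1 with ⟨x, hx⟩
    simpa using (hm x).mp hx
  obtain ⟨m1, hle1⟩ := pvMax_spec l1 h1
  obtain ⟨m2, hle2⟩ := pvMax_spec l2 h2
  exact le_antisymm (hle2 _ ((hm _).mp m1)) (hle1 _ ((hm _).mpr m2))

theorem pvMax_append (l1 l2 : List Int) (h1 : l1 ≠ []) (h2 : l2 ≠ []) :
    (PySem.List.max? (l1 ++ l2) (fun x => x)).getD 0 =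
      max ((PySem.List.max? l1 (fun x => x)).getD 0) ((PySem.List.max? l2 (fun x => x)).getD 0) := by
  have h12 : l1 ++ l2 ≠ [] := by simp [h1]
  obtain ⟨m12, hle12⟩ := pvMax_spec _ h12
  obtain ⟨m1, hle1⟩ := pvMax_spec l1 h1
  obtain ⟨m2, hle2⟩ := pvMax_spec l2 h2
  apply le_antisymm
  · rcases List.mem_append.mp m12 with h | h
    · exact le_max_of_le_left (hle1 _ h)
    · exact le_max_of_le_right (hle2 _ h)
  · exact max_le (hle12 _ (List.mem_append.mpr (Or.inl m1)))
      (hle12 _ (List.mem_append.mpr (Or.inr m2)))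

-- ===== connectivity =====
def pvUn (I : PySem.Dict Int (Int × Option Int)) (es : List Int) : List (Int × Int) :=
  es.filterMap (fun e =>
    match (I.getD e (0, none)).2 with
    | some f2 => some ((I.getD e (0, none)).1, f2)
    | none => none)

def pvAdjRel (U : List (Int × Int)) (x y : Int) : Prop := (x, y) ∈ U ∨ (y, x) ∈ U

def pvConn (U : List (Int × Int)) : Int → Int → Prop := Relation.ReflTransGen (pvAdjRel U)

theorem pvAdjRel_symm (U : List (Int × Int)) : Symmetric (pvAdjRel U) := by
  intro a b h; exact h.symm

theorem pvConn_symm (U : List (Int × Int)) {x y : Int} (h : pvConn U x y) : pvConn U y x :=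
  (Relation.ReflTransGen.symmetric (pvAdjRel_symm U)) h

theorem pvConn_mono {U V : List (Int × Int)} (hs : ∀ p ∈ U, p ∈ V) {x y : Int}
    (h : pvConn U x y) : pvConn V x y := by
  refine Relation.ReflTransGen.mono ?_ h
  intro a b hab
  rcases hab with hab | hab
  · exact Or.inl (hs _ hab)
  · exact Or.inr (hs _ hab)

theorem pvConn_nil {x y : Int} (h : pvConn [] x y) : x = y := by
  induction h with
  | refl => rfl
  | tail _ hab ih => rcases hab with hab | hab <;> simp at hab

theorem pvConn_extend (U : List (Int × Int)) (u v x y : Int) :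
    pvConn (U ++ [(u, v)]) x y ↔
      pvConn U x y ∨ (pvConn U x u ∧ pvConn U v y) ∨ (pvConn U x v ∧ pvConn U u y) := by
  constructor
  · intro h
    induction h with
    | refl => exact Or.inl Relation.ReflTransGen.refl
    | @tail b c hxb hstep ih =>
        have hstep' : pvAdjRel U b c ∨ (b = u ∧ c = v) ∨ (b = v ∧ c = u) := by
          rcases hstep with hh | hh
          · rcases List.mem_append.mp hh with hh' | hh'
            · exact Or.inl (Or.inl hh')
            · simp only [List.mem_singleton, Prod.mk.injEq] at hh'
              exact Or.inr (Or.inl ⟨hh'.1, hh'.2⟩)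
          · rcases List.mem_append.mp hh with hh' | hh'
            · exact Or.inl (Or.inr hh')
            · simp only [List.mem_singleton, Prod.mk.injEq] at hh'
              exact Or.inr (Or.inr ⟨hh'.2, hh'.1⟩)
        rcases hstep' with hs | ⟨h1, h2⟩ | ⟨h1, h2⟩
        · rcases ih with ih | ⟨ih1, ih2⟩ | ⟨ih1, ih2⟩
          · exact Or.inl (ih.tail hs)
          · exact Or.inr (Or.inl ⟨ih1, ih2.tail hs⟩)
          · exact Or.inr (Or.inr ⟨ih1, ih2.tail hs⟩)
        · subst h1; subst h2
          rcases ih with ih | ⟨ih1, ih2⟩ | ⟨ih1, ih2⟩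
          · exact Or.inr (Or.inl ⟨ih, Relation.ReflTransGen.refl⟩)
          · exact Or.inr (Or.inl ⟨ih1, Relation.ReflTransGen.refl⟩)
          · exact Or.inl ih1
        · subst h1; subst h2
          rcases ih with ih | ⟨ih1, ih2⟩ | ⟨ih1, ih2⟩
          · exact Or.inr (Or.inr ⟨ih, Relation.ReflTransGen.refl⟩)
          · exact Or.inl ih1
          · exact Or.inr (Or.inr ⟨ih1, Relation.ReflTransGen.refl⟩)
  · intro h
    have hsub : ∀ p ∈ U, p ∈ U ++ [(u, v)] := fun p hp => List.mem_append.mpr (Or.inl hp)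
    have hstep : pvConn (U ++ [(u, v)]) u v :=
      Relation.ReflTransGen.single (Or.inl (List.mem_append.mpr (Or.inr (by simp))))
    rcases h with h | ⟨h1, h2⟩ | ⟨h1, h2⟩
    · exact pvConn_mono hsub h
    · exact ((pvConn_mono hsub h1).trans hstep).trans (pvConn_mono hsub h2)
    · exact ((pvConn_mono hsub h1).trans (pvConn_symm _ hstep)).trans (pvConn_mono hsub h2)

-- ===== adjacency-dict characterization =====
def pvNbr (U : List (Int × Int)) (x : Int) : List Int :=
  U.flatMap (fun w => (if w.1 = x then [w.2] else []) ++ (if w.2 = x then [w.1] else []))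

theorem pvMem_nbr (U : List (Int × Int)) (x y : Int) : y ∈ pvNbr U x ↔ pvAdjRel U x y := by
  unfold pvNbr pvAdjRel
  rw [List.mem_flatMap]
  constructor
  · rintro ⟨w, hw, hmem⟩
    rcases List.mem_append.mp hmem with h | h
    · split at h
      · rename_i h1
        simp only [List.mem_singleton] at h
        left
        have hwxy : w = (x, y) := by cases w; simp_all
        rw [← hwxy]; exact hw
      · simp at h
    · split at h
      · rename_i h2
        simp only [List.mem_singleton] at h
        right
        have hwxy : w = (y, x) := by cases w; simp_all
        rw [← hwxy]; exact hw
      · simp at h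
  · rintro (h | h)
    · exact ⟨(x, y), h, by simp⟩
    · exact ⟨(y, x), h, by simp⟩

theorem pvAdj_getD (I : PySem.Dict Int (Int × Option Int)) (es : List Int) :
    ∀ (d : PySem.Dict Int (List Int)) (x : Int),
      (es.foldl (pvAdjStep I) d).getD x [] = d.getD x [] ++ pvNbr (pvUn I es) x := by
  induction es with
  | nil => intro d x; simp [pvUn, pvNbr]
  | cons e es ih =>
      intro d x
      simp only [List.foldl_cons]
      cases hc : (I.getD e (0, none)).2 with
      | none =>
          have hU : pvUn I (e :: es) = pvUn I es := by
            unfold pvUn; simp [List.filterMap_cons, hc]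
          have hstep : pvAdjStep I d e = d := by unfold pvAdjStep; rw [hc]
          rw [hstep, ih, hU]
      | some f2 =>
          have hU : pvUn I (e :: es) = ((I.getD e (0, none)).1, f2) :: pvUn I es := by
            unfold pvUn; simp [List.filterMap_cons, hc]
          have hstep : pvAdjStep I d e =
              (d.modify (I.getD e (0, none)).1 [] (fun l => l ++ [f2])).modify f2 []
                (fun l => l ++ [(I.getD e (0, none)).1]) := by
            unfold pvAdjStep; rw [hc]
          rw [hstep, ih, hU]
          set f1 := (I.getD e (0, none)).1 with hf1
          simp only [pvNbr, List.flatMap_cons]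
          have key : ((d.modify f1 [] (fun l => l ++ [f2])).modify f2 []
                (fun l => l ++ [f1])).getD x []
              = d.getD x [] ++ ((if f1 = x then [f2] else []) ++ (if f2 = x then [f1] else [])) := by
            rw [PySem.Dict.getD_modify]
            by_cases h2 : x = f2
            · rw [if_pos h2, PySem.Dict.getD_modify]
              by_cases h1 : f2 = f1
              · rw [if_pos h1, if_pos (by rw [h1.symm, h2.symm] : f1 = x), if_pos h2.symm]
                rw [h2, h1]; simp
              · rw [if_neg h1, if_neg (fun hh : f1 = x => h1 (by rw [hh, h2])), if_pos h2.symm]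
                rw [h2]; simp
            · rw [if_neg h2, PySem.Dict.getD_modify]
              by_cases h1 : x = f1
              · rw [if_pos h1, if_pos h1.symm, if_neg (fun hh : f2 = x => h2 hh.symm)]
                rw [h1]; simp
              · rw [if_neg h1, if_neg (fun hh : f1 = x => h1 hh.symm),
                  if_neg (fun hh : f2 = x => h2 hh.symm)]
                simp
          rw [key, List.append_assoc]

-- ===== comp-dict characterization =====
theorem pvMapVal_get? (l : List (Int × Int)) (f : Int → Int) (x : Int) :
    (PySem.Dict.mk (l.map (fun kv => (kv.1, f kv.2)))).get? x = ((PySem.Dict.mk l).get? x).map f := by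
  induction l with
  | nil => rfl
  | cons kv l ih =>
      obtain ⟨k, v⟩ := kv
      simp only [List.map_cons, PySem.Dict.get?_mk_cons]
      by_cases h : k = x
      · simp [h]
      · simp only [beq_iff_eq, if_neg h, ih]

theorem pvComp0_get? (L : List Int) :
    ∀ (d : PySem.Dict Int Int) (x : Int),
      (L.foldl (fun d f => d.insert f f) d).get? x = if x ∈ L then some x else d.get? x := by
  induction L with
  | nil => intro d x; simp
  | cons a L ih =>
      intro d x
      simp only [List.foldl_cons]
      rw [ih]
      by_cases hx : x ∈ L
      · simp [hx]
      · rw [PySem.Dict.get?_insert]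
        by_cases hxa : x = a <;> simp [hx, hxa]

def pvRep (L : List Int) (c : PySem.Dict Int Int) (U : List (Int × Int)) : Prop :=
  (∀ x ∈ L, c.get? x ≠ none) ∧
  (∀ x ∈ L, pvConn U x (c.getD x 0)) ∧
  (∀ x ∈ L, ∀ y ∈ L, (c.getD x 0 = c.getD y 0 ↔ pvConn U x y))

theorem pvRep_extend_triv (L : List Int) (c : PySem.Dict Int Int) (U : List (Int × Int))
    (f1 f2 : Int) (h1 : f1 ∈ L) (h2 : f2 ∈ L) (hrep : pvRep L c U)
    (hconn : pvConn U f1 f2) : pvRep L c (U ++ [(f1, f2)]) := by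
  obtain ⟨r1, r2, r3⟩ := hrep
  have hsub : ∀ p ∈ U, p ∈ U ++ [(f1, f2)] := fun p hp => List.mem_append.mpr (Or.inl hp)
  refine ⟨r1, fun x hx => pvConn_mono hsub (r2 x hx), fun x hx y hy => ?_⟩
  rw [r3 x hx y hy, pvConn_extend]
  constructor
  · exact Or.inl
  · rintro (h | ⟨ha, hb⟩ | ⟨ha, hb⟩)
    · exact h
    · exact (ha.trans hconn).trans hb
    · exact (ha.trans (pvConn_symm U hconn)).trans hb

theorem pvRep_extend_merge (L : List Int) (c : PySem.Dict Int Int) (U : List (Int × Int))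
    (f1 f2 : Int) (h1 : f1 ∈ L) (h2 : f2 ∈ L) (hrep : pvRep L c U)
    (hne : c.getD f1 0 ≠ c.getD f2 0) :
    pvRep L (PySem.Dict.mk (c.items.map (fun kv =>
      (kv.1, if kv.2 = c.getD f1 0 then c.getD f2 0 else kv.2)))) (U ++ [(f1, f2)]) := by
  obtain ⟨r1, r2, r3⟩ := hrep
  set a := c.getD f1 0 with ha
  set b := c.getD f2 0 with hb
  set c' := PySem.Dict.mk (c.items.map (fun kv => (kv.1, if kv.2 = a then b else kv.2))) with hc'
  have hget : ∀ x, c'.get? x = (c.get? x).map (fun v => if v = a then b else v) := by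
    intro x; exact pvMapVal_get? c.items (fun v => if v = a then b else v) x
  have hgetD : ∀ x ∈ L, c'.getD x 0 = if c.getD x 0 = a then b else c.getD x 0 := by
    intro x hx
    rcases Option.ne_none_iff_exists'.mp (r1 x hx) with ⟨v, hv⟩
    rw [PySem.Dict.getD_eq_get?_getD, hget, hv, PySem.Dict.getD_eq_get?_getD, hv]
    rfl
  have hsub : ∀ p ∈ U, p ∈ U ++ [(f1, f2)] := fun p hp => List.mem_append.mpr (Or.inl hp)
  have hstep : pvConn (U ++ [(f1, f2)]) f1 f2 :=
    Relation.ReflTransGen.single (Or.inl (List.mem_append.mpr (Or.inr (by simp))))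
  refine ⟨?_, ?_, ?_⟩
  · intro x hx
    rw [hget]
    rcases Option.ne_none_iff_exists'.mp (r1 x hx) with ⟨v, hv⟩
    rw [hv]; simp
  · intro x hx
    rw [hgetD x hx]
    by_cases hxa : c.getD x 0 = a
    · rw [if_pos hxa]
      have hconn1 : pvConn U x f1 := (r3 x hx f1 h1).mp (by rw [hxa])
      have hconn2 : pvConn U f2 b := r2 f2 h2
      exact ((pvConn_mono hsub hconn1).trans hstep).trans (pvConn_mono hsub hconn2)
    · rw [if_neg hxa]
      exact pvConn_mono hsub (r2 x hx)
  · intro x hx y hy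
    rw [hgetD x hx, hgetD y hy, pvConn_extend]
    have hxf1 : c.getD x 0 = a ↔ pvConn U x f1 := r3 x hx f1 h1
    have hyf1 : c.getD y 0 = a ↔ pvConn U y f1 := r3 y hy f1 h1
    have hxf2 : c.getD x 0 = b ↔ pvConn U x f2 := r3 x hx f2 h2
    have hyf2 : c.getD y 0 = b ↔ pvConn U y f2 := r3 y hy f2 h2
    have hxy : c.getD x 0 = c.getD y 0 ↔ pvConn U x y := r3 x hx y hy
    by_cases hxa : c.getD x 0 = a <;> by_cases hya : c.getD y 0 = a
    · simp only [if_pos hxa, if_pos hya]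
      constructor
      · intro _
        exact Or.inl (hxy.mp (hxa.trans hya.symm))
      · intro _; trivial
    · simp only [if_pos hxa, if_neg hya]
      constructor
      · intro hh
        exact Or.inr (Or.inl ⟨hxf1.mp hxa, pvConn_symm U (hyf2.mp hh.symm)⟩)
      · rintro (h | ⟨hu, hv⟩ | ⟨hu, hv⟩)
        · exact absurd ((hxy.mpr h).symm.trans hxa) hya
        · exact (hyf2.mpr (pvConn_symm U hv)).symm
        · exact absurd (hxa.symm.trans (hxf2.mpr hu)) hne
    · simp only [if_neg hxa, if_pos hya]
      constructor
      · intro hh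
        exact Or.inr (Or.inr ⟨hxf2.mp hh, pvConn_symm U (hyf1.mp hya)⟩)
      · rintro (h | ⟨hu, hv⟩ | ⟨hu, hv⟩)
        · exact absurd ((hxy.mpr h).trans hya) hxa
        · exact absurd (hxf1.mpr hu) hxa
        · exact hxf2.mpr hu
    · simp only [if_neg hxa, if_neg hya]
      constructor
      · intro hh
        exact Or.inl (hxy.mp hh)
      · rintro (h | ⟨hu, hv⟩ | ⟨hu, hv⟩)
        · exact hxy.mpr h
        · exact absurd (hxf1.mpr hu) hxa
        · exact absurd (hyf1.mpr (pvConn_symm U hv)) hya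

theorem pvComp_fold (I : PySem.Dict Int (Int × Option Int)) (L : List Int)
    (hI : ∀ e v, I.get? e = some v → v.1 ∈ L ∧ (∀ w, v.2 = some w → w ∈ L)) :
    ∀ (es : List Int) (c : PySem.Dict Int Int) (U : List (Int × Int)),
      pvRep L c U → pvRep L (es.foldl (pvCompStep I) c) (U ++ pvUn I es) := by
  intro es
  induction es with
  | nil => intro c U h; simpa [pvUn] using h
  | cons e es ih =>
      intro c U h
      simp only [List.foldl_cons]
      cases hc : (I.getD e (0, none)).2 with
      | none =>
          have hU : pvUn I (e :: es) = pvUn I es := by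
            unfold pvUn; simp [List.filterMap_cons, hc]
          have hstep : pvCompStep I c e = c := by unfold pvCompStep; rw [hc]
          rw [hstep, hU]
          exact ih c U h
      | some f2 =>
          have hU : pvUn I (e :: es) = ((I.getD e (0, none)).1, f2) :: pvUn I es := by
            unfold pvUn; simp [List.filterMap_cons, hc]
          have hsome : I.get? e ≠ none := by
            intro hn
            rw [PySem.Dict.getD_eq_get?_getD, hn] at hc
            simp at hc
          rcases Option.ne_none_iff_exists'.mp hsome with ⟨v, hv⟩
          have hgetD : I.getD e (0, none) = v := by
            rw [PySem.Dict.getD_eq_get?_getD, hv]; rfl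
          have hf1 : v.1 ∈ L := (hI e v hv).1
          have hf2 : f2 ∈ L := (hI e v hv).2 f2 (by rw [hgetD] at hc; exact hc)
          rw [hU]
          have hassoc : U ++ ((I.getD e (0, none)).1, f2) :: pvUn I es =
              (U ++ [((I.getD e (0, none)).1, f2)]) ++ pvUn I es := by simp
          rw [hassoc]
          have hstep : pvCompStep I c e =
              if c.getD (I.getD e (0, none)).1 0 ≠ c.getD f2 0 then
                PySem.Dict.mk (c.items.map (fun kv =>
                  (kv.1, if kv.2 = c.getD (I.getD e (0, none)).1 0 then c.getD f2 0 else kv.2)))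
              else c := by
            unfold pvCompStep; rw [hc]
          rw [hstep]
          have hf1' : (I.getD e (0, none)).1 ∈ L := by rw [hgetD]; exact hf1
          split
          · rename_i hne
            exact ih _ _ (pvRep_extend_merge L c U _ f2 hf1' hf2 h hne)
          · rename_i heq
            push_neg at heq
            exact ih _ _ (pvRep_extend_triv L c U _ f2 hf1' hf2 h
              ((h.2.2 _ hf1' f2 hf2).mp heq))

-- ===== cells, marks, counts =====
def pvCell (mx x : Int) : Nat := (if 0 ≤ x then x else x + mx + 1).toNat

def pvMk (mx : Int) (o : List Int) (g : Int) : Prop := o.getD (pvCell mx g) 0 ≠ -1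

def pvCnt (o : List Int) : Nat := o.count (-1)

theorem pvCell_lt (mx x : Int) (h0 : 0 ≤ mx) (hb1 : -(mx + 1) ≤ x) (hb2 : x ≤ mx) :
    pvCell mx x < (mx + 1).toNat := by
  unfold pvCell; split <;> omega

theorem pvCell_inj (mx x y : Int) (hx1 : -(mx + 1) ≤ x) (hx2 : x ≤ mx)
    (hy1 : -(mx + 1) ≤ y) (hy2 : y ≤ mx)
    (hno : ¬ (x < 0 ∧ y = x + mx + 1) ∧ ¬ (y < 0 ∧ x = y + mx + 1))
    (h : pvCell mx x = pvCell mx y) : x = y := by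
  unfold pvCell at h; split at h <;> split at h <;> omega

theorem pvGet_cell (mx x : Int) (o : List Int) (hlen : o.length = (mx + 1).toNat)
    (h0 : 0 ≤ mx) (hb1 : -(mx + 1) ≤ x) (hb2 : x ≤ mx) :
    (PySem.List.pyGet? o x).getD 0 = o.getD (pvCell mx x) 0 := by
  unfold PySem.List.pyGet? PySem.List.pyIdx? pvCell
  rw [hlen]
  split <;> rename_i hx
  · rw [if_pos (by omega)]
    simp [List.getD_eq_getElem?_getD]
  · rw [if_pos (by omega)]
    have : (mx + 1).toNat - (-x).toNat = (x + mx + 1).toNat := by omega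
    rw [this]
    simp [List.getD_eq_getElem?_getD]

theorem pvSet_cell (mx x : Int) (o : List Int) (v : Int) (hlen : o.length = (mx + 1).toNat)
    (h0 : 0 ≤ mx) (hb1 : -(mx + 1) ≤ x) (hb2 : x ≤ mx) :
    PySem.List.pySetD o x v = o.set (pvCell mx x) v := by
  unfold PySem.List.pySetD PySem.List.pySet? PySem.List.pyIdx? pvCell
  rw [hlen]
  split <;> rename_i hx
  · rw [if_pos (by omega)]
    rfl
  · rw [if_pos (by omega)]
    have : (mx + 1).toNat - (-x).toNat = (x + mx + 1).toNat := by omega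
    rw [this]
    rfl

theorem pvGetD_set (o : List Int) (j c : Nat) (v : Int) (hj : j < o.length) :
    (o.set j v).getD c 0 = if c = j then v else o.getD c 0 := by
  by_cases h : c = j
  · subst h
    rw [if_pos rfl, List.getD_eq_getElem?_getD, List.getElem?_set_self (by omega)]
    rfl
  · rw [if_neg h, List.getD_eq_getElem?_getD, List.getElem?_set_ne (by omega),
      ← List.getD_eq_getElem?_getD]

theorem pvCnt_set (o : List Int) (j : Nat) (v : Int) (hj : j < o.length)
    (hold : o.getD j 0 = -1) (hv : v ≠ -1) :
    pvCnt (o.set j v) + 1 = pvCnt o := by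
  unfold pvCnt
  have hget : o[j] = -1 := by
    rw [List.getD_eq_getElem?_getD, List.getElem?_eq_getElem hj] at hold
    simpa using hold
  rw [List.set_eq_take_cons_drop _ hj]
  conv_rhs => rw [← List.take_append_drop j o, List.drop_eq_getElem_cons hj, hget]
  simp [List.count_append, List.count_cons, hv, Ne.symm hv]
  omega

theorem pvCnt_le_len (o : List Int) : pvCnt o ≤ o.length := List.count_le_length

-- ===== reachability-avoiding-marks and array extension =====
def pvRA (U : List (Int × Int)) (P : Int → Prop) : Int → Int → Prop :=
  Relation.ReflTransGen (fun a b => pvAdjRel U a b ∧ ¬ P b)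

theorem pvRA_mono {U : List (Int × Int)} {P Q : Int → Prop} (h : ∀ z, P z → Q z)
    {f g : Int} (hr : pvRA U Q f g) : pvRA U P f g := by
  refine Relation.ReflTransGen.mono ?_ hr
  intro a b hab; exact ⟨hab.1, fun hp => hab.2 (h b hp)⟩

def pvExt (mx num : Int) (F : Int → Prop) (o o' : List Int) (S : Int → Prop) : Prop :=
  o'.length = o.length ∧
  ∀ c, c < o.length →
    ((∃ g, F g ∧ S g ∧ pvCell mx g = c) → o'.getD c 0 = num) ∧
    ((¬ ∃ g, F g ∧ S g ∧ pvCell mx g = c) → o'.getD c 0 = o.getD c 0)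

theorem pvExt_refl (mx num : Int) (F : Int → Prop) (o : List Int) :
    pvExt mx num F o o (fun _ => False) := by
  refine ⟨rfl, fun c hc => ⟨?_, fun _ => rfl⟩⟩
  rintro ⟨g, -, hg, -⟩; exact absurd hg id

theorem pvExt_congr {mx num : Int} {F : Int → Prop} {o o' : List Int} {S S' : Int → Prop}
    (h : pvExt mx num F o o' S) (hiff : ∀ g, F g → (S g ↔ S' g)) :
    pvExt mx num F o o' S' := by
  refine ⟨h.1, fun c hc => ⟨?_, ?_⟩⟩
  · rintro ⟨g, hgF, hgS, hgc⟩
    exact (h.2 c hc).1 ⟨g, hgF, (hiff g hgF).mpr hgS, hgc⟩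
  · intro hn
    refine (h.2 c hc).2 ?_
    rintro ⟨g, hgF, hgS, hgc⟩
    exact hn ⟨g, hgF, (hiff g hgF).mp hgS, hgc⟩

theorem pvExt_comp {mx num : Int} {F : Int → Prop} {o o' o'' : List Int} {S T : Int → Prop}
    (h1 : pvExt mx num F o o' S) (h2 : pvExt mx num F o' o'' T) :
    pvExt mx num F o o'' (fun g => S g ∨ T g) := by
  refine ⟨h2.1.trans h1.1, fun c hc => ⟨?_, ?_⟩⟩
  · rintro ⟨g, hgF, hgS | hgT, hgc⟩
    · by_cases hT : ∃ g, F g ∧ T g ∧ pvCell mx g = c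
      · exact (h2.2 c (h1.1 ▸ hc)).1 hT
      · rw [(h2.2 c (h1.1 ▸ hc)).2 hT]
        exact (h1.2 c hc).1 ⟨g, hgF, hgS, hgc⟩
    · exact (h2.2 c (h1.1 ▸ hc)).1 ⟨g, hgF, hgT, hgc⟩
  · intro hn
    rw [(h2.2 c (h1.1 ▸ hc)).2 (fun ⟨g, hgF, hgT, hgc⟩ => hn ⟨g, hgF, Or.inr hgT, hgc⟩)]
    exact (h1.2 c hc).2 (fun ⟨g, hgF, hgS, hgc⟩ => hn ⟨g, hgF, Or.inl hgS, hgc⟩)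

theorem pvExt_mk_mono {mx num : Int} {F : Int → Prop} {o o' : List Int} {S : Int → Prop}
    (h : pvExt mx num F o o' S) (hnum : num ≠ -1) :
    ∀ g, pvMk mx o g → pvMk mx o' g := by
  intro g hg
  have hlen := h.1
  unfold pvMk at *
  by_cases hc : pvCell mx g < o.length
  · by_cases hS : ∃ g', F g' ∧ S g' ∧ pvCell mx g' = pvCell mx g
    · rw [(h.2 _ hc).1 hS]; exact hnum
    · rw [(h.2 _ hc).2 hS]; exact hg
  · rw [List.getD_eq_default _ _ (by omega : o'.length ≤ pvCell mx g)]
    rw [List.getD_eq_default _ _ (by omega : o.length ≤ pvCell mx g)] at hg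
    exact hg

theorem pvExt_mk_new {mx num : Int} {F : Int → Prop} {o o' : List Int} {S : Int → Prop}
    (h : pvExt mx num F o o' S) (hnum : num ≠ -1) (hlen : o.length = (mx + 1).toNat)
    (h0 : 0 ≤ mx) (hFb : ∀ x, F x → -(mx + 1) ≤ x ∧ x ≤ mx) :
    ∀ g, F g → S g → pvMk mx o' g := by
  intro g hgF hgS
  unfold pvMk
  have hc : pvCell mx g < o.length := by
    rw [hlen]; exact pvCell_lt mx g h0 (hFb g hgF).1 (hFb g hgF).2
  rw [(h.2 _ hc).1 ⟨g, hgF, hgS, rfl⟩]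
  exact hnum

theorem pvExt_mk_iff {mx num : Int} {F : Int → Prop} {o o' : List Int} {S : Int → Prop}
    (h : pvExt mx num F o o' S) (hnum : num ≠ -1) (hlen : o.length = (mx + 1).toNat)
    (h0 : 0 ≤ mx) (hFb : ∀ x, F x → -(mx + 1) ≤ x ∧ x ≤ mx)
    (hinj : ∀ x y, F x → F y → pvCell mx x = pvCell mx y → x = y) (hSF : ∀ g, S g → F g) :
    ∀ g, F g → (pvMk mx o' g ↔ S g ∨ pvMk mx o g) := by
  intro g hgF
  constructor
  · intro hmk
    by_cases hS : S g
    · exact Or.inl hS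
    · right
      unfold pvMk at *
      have hc : pvCell mx g < o.length := by
        rw [hlen]; exact pvCell_lt mx g h0 (hFb g hgF).1 (hFb g hgF).2
      intro hold
      refine hmk ?_
      refine (h.2 _ hc).2 ?_ |>.trans hold
      rintro ⟨g', hg'F, hg'S, hg'c⟩
      exact hS ((hinj g' g hg'F hgF hg'c) ▸ hg'S)
  · rintro (hS | hmk)
    · exact pvExt_mk_new h hnum hlen h0 hFb g hgF hS
    · exact pvExt_mk_mono h hnum g hmk


-- ===== the DFS marking lemma =====
theorem pvExplore_spec
    (U : List (Int × Int)) (adj : PySem.Dict Int (List Int)) (mx num : Int) (F : Int → Prop)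
    (hadj : ∀ x, adj.getD x [] = pvNbr U x)
    (hUF : ∀ p ∈ U, F p.1 ∧ F p.2)
    (hFb : ∀ x, F x → -(mx + 1) ≤ x ∧ x ≤ mx)
    (h0 : 0 ≤ mx)
    (hinj : ∀ x y, F x → F y → pvCell mx x = pvCell mx y → x = y)
    (hnum : num ≠ -1) :
    ∀ fuel (o : List Int) (f : Int), F f → o.length = (mx + 1).toNat →
      ¬ pvMk mx o f → pvCnt o < fuel →
      pvExt mx num F o (pvExplore adj fuel f num o)
          (fun g => F g ∧ ¬ pvMk mx o g ∧ pvRA U (pvMk mx o) f g) ∧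
      pvCnt (pvExplore adj fuel f num o) < pvCnt o ∧
      (pvExplore adj fuel f num o).length = o.length ∧
      (∀ g, F g → ¬ pvMk mx o g → pvMk mx (pvExplore adj fuel f num o) g →
        ∀ y, pvAdjRel U g y → pvMk mx (pvExplore adj fuel f num o) y) := by
  intro fuel
  induction fuel with
  | zero => intro o f _ _ _ hcnt; omega
  | succ fuel ih =>
      intro o f hFf hlen hUnm hcnt
      have hcellf : pvCell mx f < o.length := by
        rw [hlen]; exact pvCell_lt mx f h0 (hFb f hFf).1 (hFb f hFf).2
      have hunfold : pvExplore adj (fuel + 1) f num o =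
          (adj.getD f []).foldl
            (fun o j => if (PySem.List.pyGet? o j).getD 0 = -1 then pvExplore adj fuel j num o else o)
            (PySem.List.pySetD o f num) := rfl
      have ho1 : PySem.List.pySetD o f num = o.set (pvCell mx f) num :=
        pvSet_cell mx f o num hlen h0 (hFb f hFf).1 (hFb f hFf).2
      set o1 := o.set (pvCell mx f) num with ho1def
      have hlen1 : o1.length = o.length := by simp [ho1def]
      have hcnt1 : pvCnt o1 + 1 = pvCnt o := by
        refine pvCnt_set o _ num hcellf ?_ hnum
        by_contra hne
        exact hUnm hne
      have hext1 : pvExt mx num F o o1 (fun g => g = f) := by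
        refine ⟨hlen1, fun c hc => ⟨?_, ?_⟩⟩
        · rintro ⟨g, hgF, rfl, hgc⟩
          rw [ho1def, pvGetD_set o _ c num hcellf, if_pos hgc.symm]
        · intro hn
          rw [ho1def, pvGetD_set o _ c num hcellf, if_neg (fun hh => hn ⟨f, hFf, rfl, hh.symm⟩)]
      have hmk1 : ∀ g, F g → (pvMk mx o1 g ↔ g = f ∨ pvMk mx o g) :=
        pvExt_mk_iff hext1 hnum hlen h0 hFb hinj (fun g hg => hg ▸ hFf)
      -- the guard of the inner fold reads the mark of the current array
      have hguard : ∀ (o' : List Int) (j : Int), F j → o'.length = (mx + 1).toNat →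
          ((PySem.List.pyGet? o' j).getD 0 = -1 ↔ ¬ pvMk mx o' j) := by
        intro o' j hFj hlen'
        rw [pvGet_cell mx j o' hlen' h0 (hFb j hFj).1 (hFb j hFj).2]
        unfold pvMk
        tauto
      -- inner fold invariant
      have inner : ∀ (l : List Int), (∀ j ∈ l, F j) → ∀ (o' : List Int),
          o'.length = (mx + 1).toNat → pvCnt o' < fuel →
          ∃ S, pvExt mx num F o'
              (l.foldl (fun o j =>
                if (PySem.List.pyGet? o j).getD 0 = -1 then pvExplore adj fuel j num o else o) o') S ∧
            (∀ g, S g → F g ∧ ¬ pvMk mx o' g ∧ ∃ j ∈ l, ¬ pvMk mx o' j ∧ pvRA U (pvMk mx o') j g) ∧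
            (∀ j ∈ l, pvMk mx
              (l.foldl (fun o j =>
                if (PySem.List.pyGet? o j).getD 0 = -1 then pvExplore adj fuel j num o else o) o') j) ∧
            pvCnt (l.foldl (fun o j =>
                if (PySem.List.pyGet? o j).getD 0 = -1 then pvExplore adj fuel j num o else o) o')
              ≤ pvCnt o' ∧
            (l.foldl (fun o j =>
                if (PySem.List.pyGet? o j).getD 0 = -1 then pvExplore adj fuel j num o else o) o').length
              = o'.length ∧
            (∀ g, F g → ¬ pvMk mx o' g →
              pvMk mx (l.foldl (fun o j =>
                if (PySem.List.pyGet? o j).getD 0 = -1 then pvExplore adj fuel j num o else o) o') g →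
              ∀ y, pvAdjRel U g y →
                pvMk mx (l.foldl (fun o j =>
                  if (PySem.List.pyGet? o j).getD 0 = -1 then pvExplore adj fuel j num o else o) o') y) := by
        intro l
        induction l with
        | nil =>
            intro _ o' hlen' hcnt'
            refine ⟨fun _ => False, pvExt_refl mx num F o', ?_, ?_, le_refl _, rfl, ?_⟩
            · intro g hg; exact absurd hg id
            · intro j hj; simp at hj
            · intro g _ hun hmk _ _; exact absurd hmk hun
        | cons j l ihl =>
            intro hjl o' hlen' hcnt'
            have hFj : F j := hjl j List.mem_cons_self
            have hFl : ∀ j' ∈ l, F j' := fun j' hj' => hjl j' (List.mem_cons_of_mem _ hj')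
            simp only [List.foldl_cons]
            by_cases hmkj : pvMk mx o' j
            · -- skip: j already marked
              rw [if_neg (fun hh => ((hguard o' j hFj hlen').mp hh) hmkj)]
              obtain ⟨S, hext, hSprop, hmarked, hcntle, hlenr, hclose⟩ := ihl hFl o' hlen' hcnt'
              refine ⟨S, hext, ?_, ?_, hcntle, hlenr, hclose⟩
              · intro g hg
                obtain ⟨h1, h2, j', hj', h3, h4⟩ := hSprop g hg
                exact ⟨h1, h2, j', List.mem_cons_of_mem _ hj', h3, h4⟩
              · intro j' hj'
                rcases List.mem_cons.mp hj' with rfl | hj'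
                · exact pvExt_mk_mono hext hnum j' hmkj
                · exact hmarked j' hj'
            · -- explore j
              rw [if_pos ((hguard o' j hFj hlen').mpr hmkj)]
              obtain ⟨hextj, hcntj, hlenj, hclosej⟩ := ih o' j hFj hlen' hmkj hcnt'
              set r := pvExplore adj fuel j num o' with hr
              have hlenr' : r.length = (mx + 1).toNat := by rw [hlenj, hlen']
              have hcntr' : pvCnt r < fuel := lt_trans hcntj hcnt'
              obtain ⟨S2, hext2, hS2prop, hmarked2, hcntle2, hlenr2, hclose2⟩ := ihl hFl r hlenr' hcntr'
              set res := l.foldl (fun o j =>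
                if (PySem.List.pyGet? o j).getD 0 = -1 then pvExplore adj fuel j num o else o) r with hres
              have hmono_or : ∀ g, pvMk mx o' g → pvMk mx r g := pvExt_mk_mono hextj hnum
              have hmono_rres : ∀ g, pvMk mx r g → pvMk mx res g := pvExt_mk_mono hext2 hnum
              refine ⟨fun g => (F g ∧ ¬ pvMk mx o' g ∧ pvRA U (pvMk mx o') j g) ∨ S2 g,
                pvExt_comp hextj hext2, ?_, ?_, ?_, ?_, ?_⟩
              · intro g hg
                rcases hg with ⟨h1, h2, h3⟩ | hg
                · exact ⟨h1, h2, j, List.mem_cons_self, hmkj, h3⟩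
                · obtain ⟨h1, h2, j', hj', h3, h4⟩ := hS2prop g hg
                  refine ⟨h1, fun hh => h2 (hmono_or g hh), j', List.mem_cons_of_mem _ hj',
                    fun hh => h3 (hmono_or j' hh), pvRA_mono (fun z hz => hmono_or z hz) h4⟩
              · intro j' hj'
                rcases List.mem_cons.mp hj' with rfl | hj'
                · refine hmono_rres j' ?_
                  exact pvExt_mk_new hextj hnum hlen' h0 hFb j' hFj
                    ⟨hFj, hmkj, Relation.ReflTransGen.refl⟩
                · exact hmarked2 j' hj'
              · exact le_trans hcntle2 (le_of_lt hcntj)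
              · rw [hlenr2, hlenj]
              · intro g hgF hgun hgmk y hadjy
                by_cases hgr : pvMk mx r g
                · exact hmono_rres y (hclosej g hgF hgun hgr y hadjy)
                · exact hclose2 g hgF hgr hgmk y hadjy
      -- instantiate the inner invariant on the neighbour list of f
      have hnbrF : ∀ j ∈ adj.getD f [], F j := by
        intro j hj
        rw [hadj f] at hj
        rcases (pvMem_nbr U f j).mp hj with hm | hm
        · exact (hUF _ hm).2
        · exact (hUF _ hm).1
      have hlen1' : o1.length = (mx + 1).toNat := by rw [hlen1, hlen]
      have hcnt1' : pvCnt o1 < fuel := by omega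
      obtain ⟨S, hext, hSprop, hmarked, hcntle, hlenr, hclose⟩ :=
        inner (adj.getD f []) hnbrF o1 hlen1' hcnt1'
      rw [hunfold, ho1]
      set res := (adj.getD f []).foldl
        (fun o j => if (PySem.List.pyGet? o j).getD 0 = -1 then pvExplore adj fuel j num o else o)
        o1 with hres
      have hmono1 : ∀ g, pvMk mx o g → pvMk mx o1 g := pvExt_mk_mono hext1 hnum
      have hmono2 : ∀ g, pvMk mx o1 g → pvMk mx res g := pvExt_mk_mono hext hnum
      have hSF : ∀ g, S g → F g := fun g hg => (hSprop g hg).1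
      -- all faces reachable from f (avoiding o-marks) end up marked in res
      have hreach_marked : ∀ g, pvRA U (pvMk mx o) f g → pvMk mx res g ∧ (g = f ∨ (F g ∧ ¬ pvMk mx o g)) := by
        intro g hg
        induction hg with
        | refl =>
            refine ⟨hmono2 f ?_, Or.inl rfl⟩
            exact pvExt_mk_new hext1 hnum hlen h0 hFb f hFf rfl
        | @tail b c hfb hbc ihb =>
            have hFc : F c := by
              rcases hbc.1 with hm | hm
              · exact (hUF _ hm).2
              · exact (hUF _ hm).1
            refine ⟨?_, Or.inr ⟨hFc, hbc.2⟩⟩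
            rcases ihb.2 with rfl | ⟨hFb', hbun⟩
            · -- step out of f itself: c is a neighbour of f
              refine hmarked c ?_
              rw [hadj b]
              exact (pvMem_nbr U b c).mpr hbc.1
            · -- step out of an intermediate face b
              by_cases hb1 : pvMk mx o1 b
              · rcases (hmk1 b hFb').mp hb1 with rfl | hbo
                · refine hmarked c ?_
                  rw [hadj b]
                  exact (pvMem_nbr U b c).mpr hbc.1
                · exact absurd hbo hbun
              · exact hclose b hFb' hb1 ihb.1 c hbc.1
      -- the newly marked set is exactly the reachable set
      have hset : ∀ g, F g → ((g = f ∨ S g) ↔ (F g ∧ ¬ pvMk mx o g ∧ pvRA U (pvMk mx o) f g)) := by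
        intro g hgF
        constructor
        · rintro (rfl | hgS)
          · exact ⟨hgF, hUnm, Relation.ReflTransGen.refl⟩
          · obtain ⟨-, hgun1, j, hj, hjun1, hra⟩ := hSprop g hgS
            have hjF : F j := hnbrF j hj
            have hgun : ¬ pvMk mx o g := fun hh => hgun1 (hmono1 g hh)
            have hjun : ¬ pvMk mx o j := fun hh => hjun1 (hmono1 j hh)
            refine ⟨hgF, hgun, ?_⟩
            refine Relation.ReflTransGen.head ⟨?_, hjun⟩ (pvRA_mono (fun z hz => hmono1 z hz) hra)
            rw [hadj f] at hj
            exact (pvMem_nbr U f j).mp hj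
        · rintro ⟨-, hgun, hra⟩
          have hgmk : pvMk mx res g := (hreach_marked g hra).1
          have := pvExt_mk_iff hext hnum hlen1' h0 hFb hinj hSF g hgF
          rcases this.mp hgmk with hS | hmk1'
          · exact Or.inr hS
          · rcases (hmk1 g hgF).mp hmk1' with rfl | hmko
            · exact Or.inl rfl
            · exact absurd hmko hgun
      refine ⟨?_, ?_, ?_, ?_⟩
      · -- the extension with the exact reachable set
        refine pvExt_congr (pvExt_comp hext1 hext) ?_
        intro g hgF
        exact hset g hgF
      · -- strict count decrease
        have : pvCnt res ≤ pvCnt o1 := hcntle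
        omega
      · rw [hlenr, hlen1]
      · -- closure
        intro g hgF hgun hgmk y hadjy
        by_cases hgf : g = f
        · subst hgf
          refine hmarked y ?_
          rw [hadj g]
          exact (pvMem_nbr U g y).mpr hadjy
        · have hgun1 : ¬ pvMk mx o1 g := by
            intro hh
            rcases (hmk1 g hgF).mp hh with rfl | hh'
            · exact hgf rfl
            · exact hgun hh'
          exact hclose g hgF hgun1 hgmk y hadjy

-- ===== first-occurrence dedup and labels =====
def pvDK : List Int → List Int :=
  fun xs => xs.foldl (fun acc r => if r ∈ acc then acc else acc ++ [r]) []

theorem pvDK_append (xs : List Int) (r : Int) :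
    pvDK (xs ++ [r]) = if r ∈ pvDK xs then pvDK xs else pvDK xs ++ [r] := by
  unfold pvDK
  rw [List.foldl_append]
  rfl

theorem pvDK_mem_aux (xs : List Int) (z : Int) :
    ∀ acc, (z ∈ xs.foldl (fun acc r => if r ∈ acc then acc else acc ++ [r]) acc ↔ z ∈ xs ∨ z ∈ acc) := by
  induction xs with
  | nil => intro acc; simp
  | cons a xs ih =>
      intro acc
      simp only [List.foldl_cons]
      rw [ih]
      by_cases ha : a ∈ acc <;> simp [ha] <;> aesop

theorem pvDK_mem (xs : List Int) (z : Int) : z ∈ pvDK xs ↔ z ∈ xs := by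
  unfold pvDK; rw [pvDK_mem_aux]; simp

theorem pvIdxOf_append_left (l1 l2 : List Int) (a : Int) (h : a ∈ l1) :
    (l1 ++ l2).idxOf a = l1.idxOf a := by
  induction l1 with
  | nil => simp at h
  | cons b l1 ih =>
      by_cases hb : b = a
      · subst hb; simp [List.idxOf_cons_self]
      · rcases List.mem_cons.mp h with rfl | h'
        · exact absurd rfl hb
        · simp only [List.cons_append, List.idxOf_cons_ne _ (by simpa using hb),
            List.idxOf_cons_ne _ (by simpa using hb)]
          rw [ih h']

theorem pvIdxOf_append_self (l : List Int) (a : Int) (h : a ∉ l) :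
    (l ++ [a]).idxOf a = l.length := by
  induction l with
  | nil => simp
  | cons b l ih =>
      have hb : b ≠ a := fun hh => h (hh ▸ List.mem_cons_self)
      simp only [List.cons_append, List.idxOf_cons_ne _ (by simpa using hb), List.length_cons]
      rw [ih (fun hh => h (List.mem_cons_of_mem _ hh))]

-- conn-paths become avoid-paths when every connected vertex is unmarked
theorem pvConn_to_RA (U : List (Int × Int)) (P : Int → Prop) (f g : Int)
    (hP : ∀ v, pvConn U f v → ¬ P v) (h : pvConn U f g) : pvRA U P f g := by
  induction h with
  | refl => exact Relation.ReflTransGen.refl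
  | @tail b c hfb hbc ih =>
      exact Relation.ReflTransGen.tail ih ⟨hbc, hP c (Relation.ReflTransGen.tail hfb hbc)⟩

theorem pvRA_to_conn {U : List (Int × Int)} {P : Int → Prop} {f g : Int}
    (h : pvRA U P f g) : pvConn U f g :=
  Relation.ReflTransGen.mono (fun _ _ hab => hab.1) h

-- ===== the outer loops =====
def pvAInv (mx : Int) (L : List Int) (U : List (Int × Int)) (rep : Int → Int)
    (Q : List Int) (q : List Int × Int) : Prop :=
  q.1.length = (mx + 1).toNat ∧
  q.2 = ((pvDK (Q.map rep)).length : Int) ∧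
  (∀ g ∈ L, (∃ qq ∈ Q, pvConn U qq g) →
      q.1.getD (pvCell mx g) 0 = ((pvDK (Q.map rep)).idxOf (rep g) : Int)) ∧
  (∀ c, c < (mx + 1).toNat →
      (¬ ∃ g, g ∈ L ∧ pvCell mx g = c ∧ ∃ qq ∈ Q, pvConn U qq g) → q.1.getD c 0 = -1)

theorem pvConn_mem (U : List (Int × Int)) (L : List Int)
    (hUF : ∀ p ∈ U, p.1 ∈ L ∧ p.2 ∈ L) {f v : Int} (hf : f ∈ L) (h : pvConn U f v) :
    v ∈ L := by
  induction h with
  | refl => exact hf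
  | @tail b c _ hbc _ =>
      rcases hbc with hm | hm
      · exact (hUF _ hm).2
      · exact (hUF _ hm).1

theorem pvLoopA_spec (U : List (Int × Int)) (adj : PySem.Dict Int (List Int)) (mx : Int)
    (L : List Int) (rep : Int → Int)
    (hadj : ∀ x, adj.getD x [] = pvNbr U x)
    (hUF : ∀ p ∈ U, p.1 ∈ L ∧ p.2 ∈ L)
    (hFb : ∀ x, x ∈ L → -(mx + 1) ≤ x ∧ x ≤ mx)
    (h0 : 0 ≤ mx)
    (hinj : ∀ x y, x ∈ L → y ∈ L → pvCell mx x = pvCell mx y → x = y)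
    (hrep : ∀ x ∈ L, ∀ y ∈ L, (rep x = rep y ↔ pvConn U x y)) :
    ∀ (rest Q : List Int), (∀ f ∈ rest, f ∈ L) → (∀ f ∈ Q, f ∈ L) →
      ∀ q, pvAInv mx L U rep Q q →
      pvAInv mx L U rep (Q ++ rest) (rest.foldl (pvLoopA adj) q) := by
  intro rest
  induction rest with
  | nil => intro Q _ _ q h; simpa using h
  | cons f rest ih =>
      intro Q hrest hQL q hq
      have hfL : f ∈ L := hrest f List.mem_cons_self
      obtain ⟨hqlen, hqnum, hqval, hqneg⟩ := hq
      have hcellf : pvCell mx f < (mx + 1).toNat :=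
        pvCell_lt mx f h0 (hFb f hfL).1 (hFb f hfL).2
      have hQf : Q ++ f :: rest = (Q ++ [f]) ++ rest := by simp
      rw [hQf, List.foldl_cons]
      have hQL' : ∀ x ∈ Q ++ [f], x ∈ L := by
        intro x hx
        rcases List.mem_append.mp hx with hx | hx
        · exact hQL x hx
        · simp only [List.mem_singleton] at hx; exact hx ▸ hfL
      -- the mark of any face g records whether g is connected to a processed face
      have hmkg : ∀ g ∈ L, (pvMk mx q.1 g ↔ ∃ qq ∈ Q, pvConn U qq g) := by
        intro g hgL
        have hcellg : pvCell mx g < (mx + 1).toNat :=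
          pvCell_lt mx g h0 (hFb g hgL).1 (hFb g hgL).2
        constructor
        · intro hmk
          by_contra hex
          refine hmk (hqneg (pvCell mx g) hcellg ?_)
          rintro ⟨g', hg'L, hg'c, qq, hqq, hconn⟩
          exact hex ⟨qq, hqq, (hinj g' g hg'L hgL hg'c) ▸ hconn⟩
        · intro hex
          unfold pvMk
          rw [hqval g hgL hex]
          simp
      unfold pvLoopA
      have hguard : (PySem.List.pyGet? q.1 f).getD 0 = -1 ↔ ¬ pvMk mx q.1 f := by
        rw [pvGet_cell mx f q.1 hqlen h0 (hFb f hfL).1 (hFb f hfL).2]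
        unfold pvMk; tauto
      by_cases hconnQ : ∃ qq ∈ Q, pvConn U qq f
      · -- skip: the component of f is already numbered
        rw [if_neg (fun hh => (hguard.mp hh) ((hmkg f hfL).mpr hconnQ))]
        have hDK : pvDK ((Q ++ [f]).map rep) = pvDK (Q.map rep) := by
          rw [List.map_append, List.map_singleton, pvDK_append, if_pos ?_]
          obtain ⟨qq, hqq, hconn⟩ := hconnQ
          rw [pvDK_mem]
          exact List.mem_map.mpr ⟨qq, hqq, (hrep qq (hQL qq hqq) f hfL).mpr hconn⟩
        refine ih (Q ++ [f]) (fun g hg => hrest g (List.mem_cons_of_mem _ hg)) hQL' q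
          ⟨hqlen, by rw [hDK]; exact hqnum, ?_, ?_⟩
        · intro g hgL hex
          rw [hDK]
          refine hqval g hgL ?_
          obtain ⟨qq, hqq, hconn⟩ := hex
          rcases List.mem_append.mp hqq with hqq' | hqq'
          · exact ⟨qq, hqq', hconn⟩
          · obtain ⟨qq0, hqq0, hconn0⟩ := hconnQ
            simp only [List.mem_singleton] at hqq'
            subst hqq'
            exact ⟨qq0, hqq0, hconn0.trans hconn⟩
        · intro c hc hex
          refine hqneg c hc ?_
          rintro ⟨g, hgL, hgc, qq, hqq, hconn⟩
          exact hex ⟨g, hgL, hgc, qq, List.mem_append.mpr (Or.inl hqq), hconn⟩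
      · -- explore: a new component gets the next number
        rw [if_pos (hguard.mpr (fun hh => hconnQ ((hmkg f hfL).mp hh)))]
        have hunm : ¬ pvMk mx q.1 f := fun hh => hconnQ ((hmkg f hfL).mp hh)
        have hcnt : pvCnt q.1 < q.1.length + 1 := by
          have := pvCnt_le_len q.1; omega
        have hnumne : q.2 ≠ -1 := by rw [hqnum]; intro hh; omega
        obtain ⟨hext, hcntn, hlenn, hclose⟩ :=
          pvExplore_spec U adj mx q.2 (· ∈ L) hadj (fun p hp => hUF p hp) hFb h0 hinj hnumne
            (q.1.length + 1) q.1 f hfL hqlen hunm hcnt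
        set o' := pvExplore adj (q.1.length + 1) f q.2 q.1 with ho'
        have hrepfD : rep f ∉ pvDK (Q.map rep) := by
          rw [pvDK_mem]
          intro hmem
          obtain ⟨qq, hqq, heq⟩ := List.mem_map.mp hmem
          exact hconnQ ⟨qq, hqq, (hrep qq (hQL qq hqq) f hfL).mp heq⟩
        have hDK : pvDK ((Q ++ [f]).map rep) = pvDK (Q.map rep) ++ [rep f] := by
          rw [List.map_append, List.map_singleton, pvDK_append, if_neg hrepfD]
        have hRiff : ∀ g, ((g ∈ L) ∧ ¬ pvMk mx q.1 g ∧ pvRA U (pvMk mx q.1) f g) ↔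
            (g ∈ L ∧ pvConn U f g) := by
          intro g
          constructor
          · rintro ⟨h1, -, h3⟩; exact ⟨h1, pvRA_to_conn h3⟩
          · rintro ⟨h1, hc⟩
            have hunmg : ∀ v, pvConn U f v → ¬ pvMk mx q.1 v := by
              intro v hcv hmkv
              have hvL : v ∈ L := pvConn_mem U L hUF hfL hcv
              obtain ⟨qq, hqq, hcq⟩ := (hmkg v hvL).mp hmkv
              exact hconnQ ⟨qq, hqq, hcq.trans (pvConn_symm U hcv)⟩
            exact ⟨h1, hunmg g hc, pvConn_to_RA U _ f g hunmg hc⟩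
        refine ih (Q ++ [f]) (fun g hg => hrest g (List.mem_cons_of_mem _ hg)) hQL' (o', q.2 + 1)
          ⟨by rw [hlenn, hqlen], ?_, ?_, ?_⟩
        · show q.2 + 1 = _
          rw [hDK, hqnum]
          push_cast
          simp
        · intro g hgL hex
          show o'.getD (pvCell mx g) 0 = _
          rw [hDK]
          have hcellg : pvCell mx g < (mx + 1).toNat :=
            pvCell_lt mx g h0 (hFb g hgL).1 (hFb g hgL).2
          by_cases hnew : pvConn U f g
          · have hS : (g ∈ L) ∧ ¬ pvMk mx q.1 g ∧ pvRA U (pvMk mx q.1) f g :=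
              (hRiff g).mpr ⟨hgL, hnew⟩
            rw [(hext.2 (pvCell mx g) (by rw [hqlen]; exact hcellg)).1 ⟨g, hgL, hS, rfl⟩]
            have : rep g = rep f := (hrep g hgL f hfL).mpr (pvConn_symm U hnew)
            rw [this, pvIdxOf_append_self _ _ hrepfD, hqnum]
          · obtain ⟨qq, hqq, hconn⟩ := hex
            have hqq' : qq ∈ Q := by
              rcases List.mem_append.mp hqq with h | h
              · exact h
              · simp only [List.mem_singleton] at h
                exact absurd (h ▸ hconn) hnew
            rw [(hext.2 (pvCell mx g) (by rw [hqlen]; exact hcellg)).2 ?_]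
            · rw [hqval g hgL ⟨qq, hqq', hconn⟩]
              congr 1
              refine (pvIdxOf_append_left _ _ _ ?_).symm
              rw [pvDK_mem]
              exact List.mem_map.mpr ⟨qq, hqq', (hrep qq (hQL qq hqq') g hgL).mpr hconn⟩
            · rintro ⟨g', hg'L, hS', hg'c⟩
              have : g' = g := hinj g' g hg'L hgL hg'c
              subst this
              exact hnew ((hRiff g').mp hS').2
        · intro c hc hex
          show o'.getD c 0 = -1
          rw [(hext.2 c (by rw [hqlen]; exact hc)).2 ?_]
          · refine hqneg c hc ?_
            rintro ⟨g, hgL, hgc, qq, hqq, hconn⟩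
            exact hex ⟨g, hgL, hgc, qq, List.mem_append.mpr (Or.inl hqq), hconn⟩
          · rintro ⟨g', hg'L, hS', hg'c⟩
            have hg'conn : pvConn U f g' := ((hRiff g').mp hS').2
            exact hex ⟨g', hg'L, hg'c, f, List.mem_append.mpr (Or.inr List.mem_cons_self), hg'conn⟩

def pvBInv (mx : Int) (L : List Int) (rep : Int → Int) (Q : List Int)
    (q : List Int × PySem.Dict Int Int × Int) : Prop :=
  q.1.length = (mx + 1).toNat ∧
  q.2.2 = ((pvDK (Q.map rep)).length : Int) ∧
  (∀ z, q.2.1.get? z =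
    if z ∈ pvDK (Q.map rep) then some (((pvDK (Q.map rep)).idxOf z : Nat) : Int) else none) ∧
  (∀ g ∈ Q, q.1.getD (pvCell mx g) 0 = (((pvDK (Q.map rep)).idxOf (rep g) : Nat) : Int)) ∧
  (∀ c, c < (mx + 1).toNat → (¬ ∃ g, g ∈ Q ∧ pvCell mx g = c) → q.1.getD c 0 = -1)

theorem pvLoopB_spec (mx : Int) (L : List Int) (comp : PySem.Dict Int Int)
    (hFb : ∀ x, x ∈ L → -(mx + 1) ≤ x ∧ x ≤ mx)
    (h0 : 0 ≤ mx)
    (hinj : ∀ x y, x ∈ L → y ∈ L → pvCell mx x = pvCell mx y → x = y) :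
    ∀ (rest Q : List Int), (∀ f ∈ rest, f ∈ L) → (∀ f ∈ Q, f ∈ L) →
      ∀ q, pvBInv mx L (fun x => comp.getD x 0) Q q →
      pvBInv mx L (fun x => comp.getD x 0) (Q ++ rest) (rest.foldl (pvLabelStep comp) q) := by
  intro rest
  induction rest with
  | nil => intro Q _ _ q h; simpa using h
  | cons f rest ih =>
      intro Q hrest hQL q hq
      have hfL : f ∈ L := hrest f List.mem_cons_self
      obtain ⟨hqlen, hqnum, hqlab, hqval, hqneg⟩ := hq
      have hcellf : pvCell mx f < (mx + 1).toNat :=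
        pvCell_lt mx f h0 (hFb f hfL).1 (hFb f hfL).2
      have hQf : Q ++ f :: rest = (Q ++ [f]) ++ rest := by simp
      rw [hQf, List.foldl_cons]
      have hQL' : ∀ x ∈ Q ++ [f], x ∈ L := by
        intro x hx
        rcases List.mem_append.mp hx with hx | hx
        · exact hQL x hx
        · simp only [List.mem_singleton] at hx; exact hx ▸ hfL
      have hset : PySem.List.pySetD q.1 f = fun v => q.1.set (pvCell mx f) v := by
        funext v
        exact pvSet_cell mx f q.1 v hqlen h0 (hFb f hfL).1 (hFb f hfL).2
      have hwrite : ∀ (v : Int) (g : Int), g ∈ L →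
          (q.1.set (pvCell mx f) v).getD (pvCell mx g) 0 =
            if g = f then v else q.1.getD (pvCell mx g) 0 := by
        intro v g hgL
        rw [pvGetD_set q.1 _ _ v (by rw [hqlen]; exact hcellf)]
        by_cases hgf : g = f
        · rw [if_pos hgf, if_pos (hgf ▸ rfl)]
        · rw [if_neg hgf, if_neg (fun hh => hgf (hinj g f hgL hfL hh))]
      set r := (fun x => comp.getD x 0) with hrdef
      unfold pvLabelStep
      rw [hqlab (comp.getD f 0)]
      by_cases hmem : comp.getD f 0 ∈ pvDK (Q.map r)
      · -- the class of f is already labelled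
        rw [if_pos hmem]
        have hDK : pvDK ((Q ++ [f]).map r) = pvDK (Q.map r) := by
          rw [List.map_append, List.map_singleton, pvDK_append, if_pos hmem]
        refine ih (Q ++ [f]) (fun g hg => hrest g (List.mem_cons_of_mem _ hg)) hQL' _
          ⟨?_, by rw [hDK]; exact hqnum, ?_, ?_, ?_⟩
        · show (PySem.List.pySetD q.1 f _).length = _
          rw [hset]
          simpa using hqlen
        · intro z
          rw [hDK]
          exact hqlab z
        · intro g hg
          show (PySem.List.pySetD q.1 f _).getD _ 0 = _
          rw [hset, hDK]
          rcases List.mem_append.mp hg with hg' | hg'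
          · rw [hwrite _ g (hQL g hg')]
            by_cases hgf : g = f
            · rw [if_pos hgf, hgf]
            · rw [if_neg hgf]
              exact hqval g hg'
          · simp only [List.mem_singleton] at hg'
            subst hg'
            rw [hwrite _ g hfL, if_pos rfl]
        · intro c hc hex
          show (PySem.List.pySetD q.1 f _).getD c 0 = -1
          rw [hset, pvGetD_set q.1 _ _ _ (by rw [hqlen]; exact hcellf),
            if_neg (fun hh => hex ⟨f, List.mem_append.mpr (Or.inr List.mem_cons_self), hh.symm⟩)]
          refine hqneg c hc ?_
          rintro ⟨g, hg, hgc⟩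
          exact hex ⟨g, List.mem_append.mpr (Or.inl hg), hgc⟩
      · -- first face of its class: a fresh label
        rw [if_neg hmem]
        have hDK : pvDK ((Q ++ [f]).map r) = pvDK (Q.map r) ++ [r f] := by
          rw [List.map_append, List.map_singleton, pvDK_append, if_neg hmem]
        refine ih (Q ++ [f]) (fun g hg => hrest g (List.mem_cons_of_mem _ hg)) hQL' _
          ⟨?_, ?_, ?_, ?_, ?_⟩
        · show (PySem.List.pySetD q.1 f _).length = _
          rw [hset]
          simpa using hqlen
        · show q.2.2 + 1 = _
          rw [hDK, hqnum]
          push_cast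
          simp
        · intro z
          show (q.2.1.insert (comp.getD f 0) q.2.2).get? z = _
          rw [PySem.Dict.get?_insert, hDK]
          by_cases hz : z = comp.getD f 0
          · subst hz
            rw [if_pos rfl, if_pos (List.mem_append.mpr (Or.inr List.mem_cons_self)),
              pvIdxOf_append_self _ _ hmem, hqnum]
          · rw [if_neg hz, hqlab z]
            by_cases hzD : z ∈ pvDK (Q.map r)
            · rw [if_pos hzD, if_pos (List.mem_append.mpr (Or.inl hzD)),
                pvIdxOf_append_left _ _ _ hzD]
            · rw [if_neg hzD, if_neg ?_]
              intro hh
              rcases List.mem_append.mp hh with hh' | hh'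
              · exact hzD hh'
              · simp only [List.mem_singleton] at hh'
                exact hz hh'
        · intro g hg
          show (PySem.List.pySetD q.1 f _).getD _ 0 = _
          rw [hset, hDK]
          rcases List.mem_append.mp hg with hg' | hg'
          · rw [hwrite _ g (hQL g hg')]
            by_cases hgf : g = f
            · subst hgf
              rw [if_pos rfl, pvIdxOf_append_self _ _ hmem, hqnum]
            · rw [if_neg hgf, hqval g hg',
                pvIdxOf_append_left _ _ _ (by rw [pvDK_mem]; exact List.mem_map.mpr ⟨g, hg', rfl⟩)]
          · simp only [List.mem_singleton] at hg'
            subst hg'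
            rw [hwrite _ g hfL, if_pos rfl, pvIdxOf_append_self _ _ hmem, hqnum]
        · intro c hc hex
          show (PySem.List.pySetD q.1 f _).getD c 0 = -1
          rw [hset, pvGetD_set q.1 _ _ _ (by rw [hqlen]; exact hcellf),
            if_neg (fun hh => hex ⟨f, List.mem_append.mpr (Or.inr List.mem_cons_self), hh.symm⟩)]
          refine hqneg c hc ?_
          rintro ⟨g, hg, hgc⟩
          exact hex ⟨g, List.mem_append.mpr (Or.inl hg), hgc⟩

-- ===== staging the two ports =====
def pvLL (pl : List (List Int)) : List Int := pvSetList (pvParseA pl).1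
def pvEe (pl : List (List Int)) : List Int := (pvParseA pl).2.1
def pvIi (pl : List (List Int)) : PySem.Dict Int (Int × Option Int) := (pvParseA pl).2.2
def pvAdj (pl : List (List Int)) : PySem.Dict Int (List Int) :=
  (pvEe pl).foldl (pvAdjStep (pvIi pl))
    ((pvLL pl).foldl (fun d f => d.insert f []) PySem.Dict.empty)
def pvMxA (pl : List (List Int)) : Int :=
  (PySem.List.max? ((pvLL pl) ++ (pvEe pl)) (fun x => x)).getD 0
def pvMxB (pl : List (List Int)) : Int :=
  max ((PySem.List.max? (pvLL pl) (fun x => x)).getD 0)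
      ((PySem.List.max? (pvEe pl) (fun x => x)).getD 0)
def pvCompD (pl : List (List Int)) : PySem.Dict Int Int :=
  (pvEe pl).foldl (pvCompStep (pvIi pl))
    ((pvLL pl).foldl (fun d f => d.insert f f) PySem.Dict.empty)

theorem pvA_eq (pl : List (List Int)) :
    aggregate_pairs_v2 pl =
      (pvEe pl).foldl (pvEdgeStep (pvIi pl))
        (((pvLL pl).foldl (pvLoopA (pvAdj pl))
          (List.replicate ((pvMxA pl) + 1).toNat (-1), 0)).1) := rfl

theorem pvB_eq (pl : List (List Int)) :
    aggregate_pairs_v2_alt pl =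
      (pvEe pl).foldl (pvEdgeStep (pvIi pl))
        (((pvLL pl).foldl (pvLabelStep (pvCompD pl))
          (List.replicate ((pvMxB pl) + 1).toNat (-1), PySem.Dict.empty, 0)).1) := by
  unfold aggregate_pairs_v2_alt
  rw [pvParseB_eq]
  rfl

-- ===== main equivalence =====
-- ===== VERDICT (by name: the statement is the Claim_ definition above) =====
theorem aggregate_pairs_v2_spec : Claim_equal_aggregate_pairs_v2 := by
  intro pl hdom hpre
  obtain ⟨hne, hpne, hlow, hnocol⟩ := hpre
  unfold Spec_aggregate_pairs_v2
  rw [pvA_eq, pvB_eq]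
  -- parse components
  have hParse : pvParseA pl = pl.foldl pvStepA (pvSetEmpty, [], PySem.Dict.empty) := rfl
  have hE : pvEe pl = pl.map (fun p => pvGetI p (-1)) := by
    show (pvParseA pl).2.1 = _
    rw [hParse, pvParse_edges pl _]
    simp
  have hEne : pvEe pl ≠ [] := by
    rw [hE]
    intro hh
    exact hne (List.map_eq_nil_iff.mp hh)
  have hSet : (pvParseA pl).1 = (pvFaceIds pl).foldl pvSetAdd pvSetEmpty := by
    rw [hParse, pvParse_set pl _]
    rfl
  have hLmem : ∀ x, x ∈ pvLL pl ↔ x ∈ pvFaceIds pl := by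
    intro x
    have hperm : List.Perm ((pvParseA pl).1.1.filterMap id) (pvParseA pl).1.2 := by
      rw [hSet]
      refine pvFoldSetAdd_keys _ _ ?_
      simp [pvSetEmpty]
    have hmem := pvFoldSetAdd_mem (pvFaceIds pl) pvSetEmpty x
    rw [← hSet] at hmem
    unfold pvLL pvSetList
    rw [hperm.mem_iff, hmem]
    simp [pvSetEmpty]
  have hFaceUsed : ∀ x, x ∈ pvFaceIds pl → x ∈ pvUsedIds pl := by
    intro x hx
    obtain ⟨p, hp, hxp⟩ := List.mem_flatMap.mp hx
    refine List.mem_flatMap.mpr ⟨p, hp, ?_⟩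
    unfold pvFacesOf at hxp
    unfold pvUsedOf
    rcases List.mem_append.mp hxp with h | h
    · simp only [List.mem_singleton] at h
      subst h
      simp
    · simp only [List.mem_append]
      right
      exact h
  have hFaceNe : pvFaceIds pl ≠ [] := by
    obtain ⟨p, pl', rfl⟩ := List.exists_cons_of_ne_nil hne
    unfold pvFaceIds
    simp [pvFacesOf]
  have hLne : pvLL pl ≠ [] := by
    obtain ⟨x, hx⟩ := List.exists_mem_of_ne_nil _ hFaceNe
    exact List.ne_nil_of_mem ((hLmem x).mpr hx)
  -- info values are faces
  have hInfoF : ∀ e v, (pvIi pl).get? e = some v →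
      v.1 ∈ pvLL pl ∧ (∀ w, v.2 = some w → w ∈ pvLL pl) := by
    have hS : ∀ p ∈ pl, (pvGetI p 0) ∈ pvFaceIds pl ∧ (p.length = 3 → (pvGetI p 1) ∈ pvFaceIds pl) := by
      intro p hp
      constructor
      · exact List.mem_flatMap.mpr ⟨p, hp, by unfold pvFacesOf; simp⟩
      · intro h3
        exact List.mem_flatMap.mpr ⟨p, hp, by unfold pvFacesOf; simp [h3]⟩
    have := pvParse_info_mem pl (· ∈ pvFaceIds pl) hS (pvSetEmpty, [], PySem.Dict.empty)
      (by intro e v hv; rw [PySem.Dict.get?_empty] at hv; simp at hv)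
    intro e v hv
    obtain ⟨h1, h2⟩ := this e v hv
    exact ⟨(hLmem _).mpr h1, fun w hw => (hLmem _).mpr (h2 w hw)⟩
  -- the union list and its endpoints
  set U := pvUn (pvIi pl) (pvEe pl) with hUdef
  have hUF : ∀ p ∈ U, p.1 ∈ pvLL pl ∧ p.2 ∈ pvLL pl := by
    intro p hp
    rw [hUdef] at hp
    unfold pvUn at hp
    obtain ⟨e, he, hmatch⟩ := List.mem_filterMap.mp hp
    cases hc : ((pvIi pl).getD e (0, none)).2 with
    | none => rw [hc] at hmatch; simp at hmatch
    | some f2 =>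
        rw [hc] at hmatch
        have hp2 : p = (((pvIi pl).getD e (0, none)).1, f2) := by
          simpa using hmatch.symm
        have hsome : (pvIi pl).get? e ≠ none := by
          intro hn
          rw [PySem.Dict.getD_eq_get?_getD, hn] at hc
          simp at hc
        rcases Option.ne_none_iff_exists'.mp hsome with ⟨v, hv⟩
        have hgv : (pvIi pl).getD e (0, none) = v := by
          rw [PySem.Dict.getD_eq_get?_getD, hv]; rfl
        obtain ⟨h1, h2⟩ := hInfoF e v hv
        rw [hp2, hgv]
        exact ⟨h1, h2 f2 (by rw [← hgv]; exact hc)⟩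
  -- maxima and bounds
  set M := (PySem.List.max? (pvUsedIds pl) (fun x => x)).getD 0 with hMdef
  have hmemLE : ∀ x, x ∈ pvLL pl ++ pvEe pl ↔ x ∈ pvUsedIds pl := by
    intro x
    rw [List.mem_append, hLmem]
    constructor
    · rintro (h | h)
      · exact hFaceUsed x h
      · rw [hE] at h
        obtain ⟨p, hp, rfl⟩ := List.mem_map.mp h
        refine List.mem_flatMap.mpr ⟨p, hp, ?_⟩
        unfold pvUsedOf
        simp
    · intro h
      obtain ⟨p, hp, hxp⟩ := List.mem_flatMap.mp h
      unfold pvUsedOf at hxp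
      rcases List.mem_append.mp hxp with h' | h'
      · rcases List.mem_cons.mp h' with rfl | h''
        · left
          exact List.mem_flatMap.mpr ⟨p, hp, by unfold pvFacesOf; simp⟩
        · simp only [List.mem_singleton] at h''
          subst h''
          right
          rw [hE]
          exact List.mem_map.mpr ⟨p, hp, rfl⟩
      · split at h'
        · simp only [List.mem_singleton] at h'
          subst h'
          left
          refine List.mem_flatMap.mpr ⟨p, hp, ?_⟩
          unfold pvFacesOf
          rename_i h3
          simp [h3]
        · simp at h'
  have hMeq : pvMxA pl = M := by
    unfold pvMxA
    rw [hMdef]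
    refine pvMax_eq_of_same_mem _ _ (by simp [hLne]) hmemLE
  have hFb : ∀ x, x ∈ pvLL pl → -(pvMxA pl + 1) ≤ x ∧ x ≤ pvMxA pl := by
    intro x hx
    have hxLE : x ∈ pvLL pl ++ pvEe pl := List.mem_append.mpr (Or.inl hx)
    constructor
    · rw [hMeq]; exact hlow x ((hmemLE x).mp hxLE)
    · exact (pvMax_spec _ (by simp [hLne])).2 x hxLE
  have hEb : ∀ x, x ∈ pvEe pl → -(pvMxA pl + 1) ≤ x ∧ x ≤ pvMxA pl := by
    intro x hx
    have hxLE : x ∈ pvLL pl ++ pvEe pl := List.mem_append.mpr (Or.inr hx)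
    constructor
    · rw [hMeq]; exact hlow x ((hmemLE x).mp hxLE)
    · exact (pvMax_spec _ (by simp [hLne])).2 x hxLE
  have h0 : 0 ≤ pvMxA pl := by
    have hmem : pvMxA pl ∈ pvLL pl ++ pvEe pl :=
      (pvMax_spec (pvLL pl ++ pvEe pl) (by simp [hLne])).1
    have hmem' : M ∈ pvLL pl ++ pvEe pl := hMeq ▸ hmem
    have hb1 : -(M + 1) ≤ M := hlow M ((hmemLE M).mp hmem')
    rw [hMeq]
    omega
  have hinj : ∀ x y, x ∈ pvLL pl → y ∈ pvLL pl →
      pvCell (pvMxA pl) x = pvCell (pvMxA pl) y → x = y := by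
    intro x y hx hy hc
    refine pvCell_inj (pvMxA pl) x y (hFb x hx).1 (hFb x hx).2 (hFb y hy).1 (hFb y hy).2 ⟨?_, ?_⟩ hc
    · rintro ⟨hx0, hyx⟩
      refine hnocol x ((hLmem x).mp hx) hx0 ?_
      rw [← hMeq, ← hyx]
      exact (hLmem y).mp hy
    · rintro ⟨hy0, hxy⟩
      refine hnocol y ((hLmem y).mp hy) hy0 ?_
      rw [← hMeq, ← hxy]
      exact (hLmem x).mp hx
  have hMxBA : pvMxB pl = pvMxA pl := by
    unfold pvMxB pvMxA
    exact (pvMax_append _ _ hLne hEne).symm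
  -- adjacency
  have hadj0 : ∀ (l : List Int) (d : PySem.Dict Int (List Int)) (x : Int), d.getD x [] = [] →
      (l.foldl (fun d f => d.insert f []) d).getD x [] = [] := by
    intro l
    induction l with
    | nil => intro d x h; exact h
    | cons a l ih =>
        intro d x h
        simp only [List.foldl_cons]
        refine ih _ x ?_
        rw [PySem.Dict.getD_insert]
        split <;> [rfl; exact h]
  have hadj : ∀ x, (pvAdj pl).getD x [] = pvNbr U x := by
    intro x
    unfold pvAdj
    rw [pvAdj_getD (pvIi pl) (pvEe pl) _ x,
      hadj0 (pvLL pl) PySem.Dict.empty x (by rw [PySem.Dict.getD_empty])]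
    rw [← hUdef]
    simp
  -- the merged class map characterizes connectivity
  have hRep0 : pvRep (pvLL pl) ((pvLL pl).foldl (fun d f => d.insert f f) PySem.Dict.empty) [] := by
    refine ⟨?_, ?_, ?_⟩
    · intro x hx
      rw [pvComp0_get?, if_pos hx]
      simp
    · intro x hx
      rw [PySem.Dict.getD_eq_get?_getD, pvComp0_get?, if_pos hx]
      exact Relation.ReflTransGen.refl
    · intro x hx y hy
      rw [PySem.Dict.getD_eq_get?_getD, pvComp0_get?, if_pos hx,
        PySem.Dict.getD_eq_get?_getD, pvComp0_get?, if_pos hy]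
      simp only [Option.getD_some]
      constructor
      · intro h
        exact h ▸ Relation.ReflTransGen.refl
      · intro h
        exact pvConn_nil h
  have hRep : pvRep (pvLL pl) (pvCompD pl) U := by
    have := pvComp_fold (pvIi pl) (pvLL pl) hInfoF (pvEe pl)
      ((pvLL pl).foldl (fun d f => d.insert f f) PySem.Dict.empty) [] hRep0
    simpa [pvCompD] using this
  set rep : Int → Int := fun x => (pvCompD pl).getD x 0 with hrepdef
  have hrepiff : ∀ x ∈ pvLL pl, ∀ y ∈ pvLL pl, (rep x = rep y ↔ pvConn U x y) := hRep.2.2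
  -- run the two labelling loops
  set N := ((pvMxA pl) + 1).toNat with hNdef
  have hAinv0 : pvAInv (pvMxA pl) (pvLL pl) U rep [] (List.replicate N (-1), 0) := by
    refine ⟨by simp [hNdef], by simp [pvDK], ?_, ?_⟩
    · intro g _ hex
      obtain ⟨qq, hqq, -⟩ := hex
      simp at hqq
    · intro c hc _
      exact List.getD_replicate _ hc
  have hAfin := pvLoopA_spec U (pvAdj pl) (pvMxA pl) (pvLL pl) rep hadj hUF hFb h0 hinj hrepiff
    (pvLL pl) [] (fun f hf => hf) (by simp) _ hAinv0
  simp only [List.nil_append] at hAfin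
  have hBinv0 : pvBInv (pvMxA pl) (pvLL pl) rep [] (List.replicate N (-1), PySem.Dict.empty, 0) := by
    refine ⟨by simp [hNdef], by simp [pvDK], ?_, ?_, ?_⟩
    · intro z
      rw [PySem.Dict.get?_empty]
      simp [pvDK]
    · intro g hg
      simp at hg
    · intro c hc _
      exact List.getD_replicate _ hc
  have hBfin := pvLoopB_spec (pvMxA pl) (pvLL pl) (pvCompD pl) hFb h0 hinj
    (pvLL pl) [] (fun f hf => hf) (by simp) _ hBinv0
  simp only [List.nil_append] at hBfin
  -- the two face-phase arrays coincide
  have hNB : ((pvMxB pl) + 1).toNat = N := by rw [hMxBA]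
  rw [hNB]
  obtain ⟨hAlen, -, hAval, hAneg⟩ := hAfin
  obtain ⟨hBlen, -, -, hBval, hBneg⟩ := hBfin
  have harrays :
      ((pvLL pl).foldl (pvLoopA (pvAdj pl)) (List.replicate N (-1), 0)).1 =
      ((pvLL pl).foldl (pvLabelStep (pvCompD pl)) (List.replicate N (-1), PySem.Dict.empty, 0)).1 := by
    refine List.ext_getElem (by rw [hAlen, hBlen]) ?_
    intro i h1 h2
    have hiN : i < N := by rw [hNdef, ← hAlen]; exact h1
    rw [← List.getD_eq_getElem _ 0 h1, ← List.getD_eq_getElem _ 0 h2]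
    by_cases hex : ∃ g, g ∈ pvLL pl ∧ pvCell (pvMxA pl) g = i
    · obtain ⟨g, hgL, hgc⟩ := hex
      rw [← hgc]
      rw [hAval g hgL ⟨g, hgL, Relation.ReflTransGen.refl⟩, hBval g hgL]
    · rw [hAneg i hiN ?_, hBneg i hiN hex]
      rintro ⟨g, hgL, hgc, -⟩
      exact hex ⟨g, hgL, hgc⟩
  rw [harrays]
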